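-- pv_equiv track=rewrite | github.com/usiohc/BOJ_study-baekjunhub- | 프로그래머스/lv2/86971. 전력망을 둘로 나누기/전력망을 둘로 나누기.py | solution
-- ===== SOURCE A (Python) =====
-- from collections import deque
--
-- def bfs(s, v, graph):
--     que = deque([s])
--     result = 1
--     v[s] = 1
--     while que:
--         q = que.popleft()
--         for i in graph[q]:
--             if v[i] == 0:
--                 result += 1
--                 que.append(i)
--                 v[i] = 1
--
--     return result
--
-- def solution(n, wires):
--     answer = n
--     graph = [[] for _ in range(n+1)]
--     for w in wires:
--         graph[w[0]].append(w[1])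
--         graph[w[1]].append(w[0])
--
--     for i, j in wires:
--         visited = [0]*(n+1)
--         visited[j] = 1
--         answer = min(answer, abs(bfs(i, visited, graph) *2 - n))
--
--     return answer
-- ===== SOURCE B (Python) =====
-- def solution(n, wires):
--     best = n
--     for i, j in wires:
--         # size of the piece containing i once node j is sealed off: saturate a
--         # visited bitmap by repeated relaxation sweeps over the wire list (no
--         # adjacency structure, no queue); 2*len(wires)+1 sweeps always reach
--         # the fixpoint, the early exit usually sooner.
--         comp = bytearray(n + 1)
--         comp[i] = 1
--         for _ in range(2 * len(wires) + 1):
--             changed = False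
--             for a, b in wires:
--                 if comp[a] and b != j and not comp[b]:
--                     comp[b] = 1
--                     changed = True
--                 if comp[b] and a != j and not comp[a]:
--                     comp[a] = 1
--                     changed = True
--             if not changed:
--                 break
--         best = min(best, abs(2 * sum(comp) - n))
--     return best
-- ===== Notes on version B (the rewrite author's own statement) =====
-- stated objective: alternative
-- what changed: Per removed wire, B saturates a visited bitmap by repeated relaxation sweeps over the wire list (fixpoint iteration with early exit) instead of building an adjacency list and running a queue-based BFS; Pre_ excludes wire endpoints outside [-(n+1), n], on which both programs raise, and wires where a negative endpoint denotes the same node slot as a nonnegative endpoint through Python's negative-list-index wraparound, an accidental identification of two labels on which A's and B's readings are both defensible.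
-- outside the precondition, e.g. on solution(2, [(1, -1), (1, 2)]): A returns 0, B returns 2
import Mathlib
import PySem

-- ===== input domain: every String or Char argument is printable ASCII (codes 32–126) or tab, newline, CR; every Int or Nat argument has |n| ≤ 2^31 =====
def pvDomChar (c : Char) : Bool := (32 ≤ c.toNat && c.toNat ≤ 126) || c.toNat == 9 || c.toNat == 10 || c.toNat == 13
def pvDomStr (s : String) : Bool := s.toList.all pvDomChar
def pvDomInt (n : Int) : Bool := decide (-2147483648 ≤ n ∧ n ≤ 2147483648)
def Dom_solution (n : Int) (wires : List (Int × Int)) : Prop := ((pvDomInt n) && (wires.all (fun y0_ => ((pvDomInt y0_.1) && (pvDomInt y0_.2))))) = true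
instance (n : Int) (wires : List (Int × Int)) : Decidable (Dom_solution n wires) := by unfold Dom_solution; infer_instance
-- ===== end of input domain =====

-- B replaces A's adjacency-list + queue BFS per removed wire with relaxation
-- sweeps over the wire list on a visited bitmap (alternative algorithm, same
-- results on the domain stated by Pre_).


-- ===== PORT A =====
-- graph[i].append(x); pyGetD/pySetD are exact wherever the Python does not raise
def appendAt (g : List (List Int)) (i : Int) (x : Int) : List (List Int) :=
  PySem.List.pySetD g i ((PySem.List.pyGetD g i []) ++ [x])

def buildG (n : Int) (wires : List (Int × Int)) : List (List Int) :=
  wires.foldl (fun g w => appendAt (appendAt g w.1 w.2) w.2 w.1)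
    ((List.range (n + 1).toNat).map fun _ => ([] : List Int))

def visitStep (st : Int × List Int × List Int) (i : Int) : Int × List Int × List Int :=
  if PySem.List.pyGetD st.2.2 i 0 = 0 then
    (st.1 + 1, st.2.1 ++ [i], PySem.List.pySetD st.2.2 i 1)
  else st

-- the 'while que' loop; state (result, que, v); the fuel v.length + 1 passed by
-- bfs below always suffices: each iteration pops one element and every enqueue
-- flips a visited entry 0 -> 1
def bfsLoop (graph : List (List Int)) : Nat → List Int → List Int → Int → Int × List Int
  | 0, _, v, result => (result, v)
  | _ + 1, [], v, result => (result, v)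
  | fuel + 1, q :: rest, v, result =>
    let st := (PySem.List.pyGetD graph q []).foldl visitStep (result, rest, v)
    bfsLoop graph fuel st.2.1 st.2.2 st.1

def bfs (s : Int) (v : List Int) (graph : List (List Int)) : Int :=
  (bfsLoop graph (v.length + 1) [s] (PySem.List.pySetD v s 1) 1).1

def solution (n : Int) (wires : List (Int × Int)) : Int :=
  let graph := buildG n wires
  wires.foldl
    (fun answer w =>
      let visited := PySem.List.pySetD (List.replicate (n + 1).toNat (0 : Int)) w.2 1
      min answer |bfs w.1 visited graph * 2 - n|)
    n

-- ===== PORT B =====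
-- one sweep over a single wire; state (comp bitmap, changed flag).
-- pyGetD/pySetD are exact wherever the Python bytearray indexing does not raise
def arrStep (j : Int) (st : List Int × Bool) (w : Int × Int) : List Int × Bool :=
  let st1 := if PySem.List.pyGetD st.1 w.1 0 ≠ 0 ∧ w.2 ≠ j ∧ PySem.List.pyGetD st.1 w.2 0 = 0
    then (PySem.List.pySetD st.1 w.2 1, true) else st
  if PySem.List.pyGetD st1.1 w.2 0 ≠ 0 ∧ w.1 ≠ j ∧ PySem.List.pyGetD st1.1 w.1 0 = 0
    then (PySem.List.pySetD st1.1 w.1 1, true) else st1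

-- 'for _ in range(2*len(wires)+1): ... if not changed: break'
def arrLoop (wires : List (Int × Int)) (j : Int) : Nat → List Int → List Int
  | 0, comp => comp
  | fuel + 1, comp =>
    let st := wires.foldl (arrStep j) (comp, false)
    if st.2 then arrLoop wires j fuel st.1 else st.1

def solution_alt (n : Int) (wires : List (Int × Int)) : Int :=
  wires.foldl
    (fun best w =>
      min best |2 * (arrLoop wires w.2 (2 * wires.length + 1)
        (PySem.List.pySetD (List.replicate (n + 1).toNat (0 : Int)) w.1 1)).foldl (· + ·) 0 - n|)
    n

-- ===== PRECONDITION & SPEC =====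
def wireEnds (wires : List (Int × Int)) : List Int :=
  wires.flatMap (fun w => [w.1, w.2])

-- Pre_ excludes wire endpoints outside [-(n+1), n], on which A raises IndexError,
-- and wires where a negative endpoint denotes the same node slot as a nonnegative
-- endpoint through Python's negative-list-index wraparound — an accidental
-- identification of two distinct labels on which A's and B's readings are both
-- defensible; all other inputs (including non-aliasing negative labels) are kept.
def Pre_solution (n : Int) (wires : List (Int × Int)) : Prop :=
  (∀ w ∈ wires, -(n + 1) ≤ w.1 ∧ w.1 ≤ n ∧ -(n + 1) ≤ w.2 ∧ w.2 ≤ n) ∧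
  (∀ x ∈ wireEnds wires, ∀ y ∈ wireEnds wires, x < 0 → 0 ≤ y → y ≠ x + n + 1)
instance (n : Int) (wires : List (Int × Int)) : Decidable (Pre_solution n wires) := by
  unfold Pre_solution; infer_instance

def pvWitness_solution : Int × (List (Int × Int)) := (4, [(1, 3), (2, 3), (3, 4)])

def Spec_solution (n : Int) (wires : List (Int × Int)) (out : Int) : Prop := out = solution_alt n wires
instance (n : Int) (wires : List (Int × Int)) (out : Int) : Decidable (Spec_solution n wires out) := by unfold Spec_solution; infer_instance

-- ===== CLAIM (what is proved, stated in full; the proofs are below) =====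
def Claim_equal_solution : Prop := ∀ (n : Int) (wires : List (Int × Int)), Dom_solution n wires → Pre_solution n wires → Spec_solution n wires (solution n wires)

-- ===== LEMMAS AND PROOFS =====

-- the label-set mirror of B's sweep, used only by the proofs
def altStep (j : Int) (st : PySem.Set Int × Bool) (w : Int × Int) : PySem.Set Int × Bool :=
  let st1 := if w.1 ∈ st.1 ∧ w.2 ≠ j ∧ w.2 ∉ st.1 then (PySem.Set.add st.1 w.2, true) else st
  if w.2 ∈ st1.1 ∧ w.1 ≠ j ∧ w.1 ∉ st1.1 then (PySem.Set.add st1.1 w.1, true) else st1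

def altLoop (wires : List (Int × Int)) (j : Int) : Nat → PySem.Set Int → PySem.Set Int
  | 0, marked => marked
  | fuel + 1, marked =>
    let st := wires.foldl (altStep j) (marked, false)
    if st.2 then altLoop wires j fuel st.1 else st.1

def Adj (wires : List (Int × Int)) (a b : Int) : Prop := (a, b) ∈ wires ∨ (b, a) ∈ wires

inductive Reach (wires : List (Int × Int)) (j i : Int) : Int → Prop
  | base : Reach wires j i i
  | step (a b : Int) : Reach wires j i a → Adj wires a b → b ≠ j → Reach wires j i b

def Closed (wires : List (Int × Int)) (j : Int) (m : List Int) : Prop :=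
  ∀ w ∈ wires, (w.1 ∈ m → w.2 = j ∨ w.2 ∈ m) ∧ (w.2 ∈ m → w.1 = j ∨ w.1 ∈ m)

lemma prefix_add (s : PySem.Set Int) (x : Int) : s <+: PySem.Set.add s x := by
  rw [PySem.Set.add_eq_ite]; split_ifs
  · exact List.prefix_refl s
  · exact List.prefix_append s [x]

lemma altStep_prefix (j : Int) (st : PySem.Set Int × Bool) (w : Int × Int) :
    st.1 <+: (altStep j st w).1 := by
  unfold altStep
  by_cases c1 : w.1 ∈ st.1 ∧ w.2 ≠ j ∧ w.2 ∉ st.1 <;> simp only [c1, if_true, if_false] <;> split_ifs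
  all_goals first
    | exact List.prefix_refl _
    | exact prefix_add _ _
    | exact (prefix_add _ _).trans (prefix_add _ _)

lemma foldl_altStep_prefix (j : Int) : ∀ (ws : List (Int × Int)) (st : PySem.Set Int × Bool),
    st.1 <+: (ws.foldl (altStep j) st).1
  | [], st => List.prefix_refl _
  | w :: ws, st => (altStep_prefix j st w).trans (foldl_altStep_prefix j ws (altStep j st w))

lemma altStep_flag (j : Int) (st : PySem.Set Int × Bool) (w : Int × Int) (h : st.2 = true) :
    (altStep j st w).2 = true := by
  unfold altStep
  by_cases c1 : w.1 ∈ st.1 ∧ w.2 ≠ j ∧ w.2 ∉ st.1 <;> simp only [c1, if_true, if_false] <;> split_ifs <;> simp_all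

lemma foldl_altStep_flag (j : Int) : ∀ (ws : List (Int × Int)) (st : PySem.Set Int × Bool),
    st.2 = true → (ws.foldl (altStep j) st).2 = true
  | [], _, h => h
  | w :: ws, st, h => foldl_altStep_flag j ws _ (altStep_flag j st w h)

lemma altStep_nodup (j : Int) (st : PySem.Set Int × Bool) (w : Int × Int) (h : st.1.Nodup) :
    (altStep j st w).1.Nodup := by
  unfold altStep
  by_cases c1 : w.1 ∈ st.1 ∧ w.2 ≠ j ∧ w.2 ∉ st.1 <;> simp only [c1, if_true, if_false] <;> split_ifs <;>
    first
      | exact h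
      | exact PySem.Set.nodup_add _ _ h
      | exact PySem.Set.nodup_add _ _ (PySem.Set.nodup_add _ _ h)

lemma foldl_altStep_nodup (j : Int) : ∀ (ws : List (Int × Int)) (st : PySem.Set Int × Bool),
    st.1.Nodup → (ws.foldl (altStep j) st).1.Nodup
  | [], _, h => h
  | w :: ws, st, h => foldl_altStep_nodup j ws _ (altStep_nodup j st w h)

lemma altStep_sound (j : Int) (R : Int → Prop) (st : PySem.Set Int × Bool) (w : Int × Int)
    (hst : ∀ y ∈ st.1, R y) (h1 : R w.1 → w.2 ≠ j → R w.2) (h2 : R w.2 → w.1 ≠ j → R w.1) :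
    ∀ y ∈ (altStep j st w).1, R y := by
  have hadd : ∀ (s : PySem.Set Int) (x : Int), (∀ y ∈ s, R y) → R x →
      ∀ y ∈ PySem.Set.add s x, R y := by
    intro s x hs hx y hy
    rcases (PySem.Set.mem_add s x y).mp hy with hy | rfl
    · exact hs y hy
    · exact hx
  by_cases c1 : w.1 ∈ st.1 ∧ w.2 ≠ j ∧ w.2 ∉ st.1
  · simp only [altStep, if_pos c1]
    have hR2 : R w.2 := h1 (hst _ c1.1) c1.2.1
    have hs1 : ∀ y ∈ PySem.Set.add st.1 w.2, R y := hadd _ _ hst hR2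
    split_ifs with c2
    · exact hadd _ _ hs1 (h2 hR2 c2.2.1)
    · exact hs1
  · simp only [altStep, if_neg c1]
    split_ifs with c2
    · exact hadd _ _ hst (h2 (hst _ c2.1) c2.2.1)
    · exact hst

lemma foldl_altStep_sound (j : Int) (R : Int → Prop) :
    ∀ (ws : List (Int × Int)) (st : PySem.Set Int × Bool),
    (∀ y ∈ st.1, R y) →
    (∀ w ∈ ws, (R w.1 → w.2 ≠ j → R w.2) ∧ (R w.2 → w.1 ≠ j → R w.1)) →
    ∀ y ∈ (ws.foldl (altStep j) st).1, R y
  | [], _, hst, _ => hst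
  | w :: ws, st, hst, hws =>
    foldl_altStep_sound j R ws _
      (altStep_sound j R st w hst (hws w (by simp)).1 (hws w (by simp)).2)
      (fun v hv => hws v (by simp [hv]))

lemma altStep_of_flag_false (j : Int) (m : PySem.Set Int) (w : Int × Int)
    (h : (altStep j (m, false) w).2 = false) :
    altStep j (m, false) w = (m, false) ∧
      (w.1 ∈ m → w.2 = j ∨ w.2 ∈ m) ∧ (w.2 ∈ m → w.1 = j ∨ w.1 ∈ m) := by
  by_cases c1 : w.1 ∈ m ∧ w.2 ≠ j ∧ w.2 ∉ m
  · simp only [altStep, if_pos c1] at h; split_ifs at h <;> simp at h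
  · simp only [altStep, if_neg c1] at h ⊢
    split_ifs at h ⊢ with c2
    push_neg at c1 c2
    refine ⟨rfl, ?_, ?_⟩
    · intro hm
      by_cases hj : w.2 = j
      · exact Or.inl hj
      · exact Or.inr (c1 hm hj)
    · intro hm
      by_cases hj : w.1 = j
      · exact Or.inl hj
      · exact Or.inr (c2 hm hj)

lemma foldl_altStep_false (j : Int) : ∀ (ws : List (Int × Int)) (m : PySem.Set Int),
    (ws.foldl (altStep j) (m, false)).2 = false →
    (ws.foldl (altStep j) (m, false)).1 = m ∧ Closed ws j m
  | [], m, _ => ⟨rfl, by simp [Closed]⟩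
  | w :: ws, m, h => by
    simp only [List.foldl_cons] at h ⊢
    have hflag : (altStep j (m, false) w).2 = false := by
      by_cases hs : (altStep j (m, false) w).2 = true
      · rw [foldl_altStep_flag j ws _ hs] at h; exact absurd h (by simp)
      · simpa using hs
    obtain ⟨heq, himp1, himp2⟩ := altStep_of_flag_false j m w hflag
    rw [heq] at h ⊢
    obtain ⟨h1, h2⟩ := foldl_altStep_false j ws m h
    refine ⟨h1, ?_⟩
    intro v hv
    rcases List.mem_cons.mp hv with rfl | hv
    · exact ⟨himp1, himp2⟩
    · exact h2 v hv

lemma altStep_true_length (j : Int) (st : PySem.Set Int × Bool) (w : Int × Int)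
    (h : st.2 = false) (h2 : (altStep j st w).2 = true) :
    st.1.length + 1 ≤ (altStep j st w).1.length := by
  by_cases c1 : w.1 ∈ st.1 ∧ w.2 ≠ j ∧ w.2 ∉ st.1
  · simp only [altStep, if_pos c1]
    have hl1 : st.1.length + 1 = (PySem.Set.add st.1 w.2).length := by
      rw [PySem.Set.add_of_not_mem c1.2.2]; simp
    split_ifs with c2 <;> dsimp only <;>
      (have := (prefix_add (PySem.Set.add st.1 w.2) w.1).length_le; omega)
  · simp only [altStep, if_neg c1] at h2 ⊢
    split_ifs at h2 ⊢ with c2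
    · rw [PySem.Set.add_of_not_mem c2.2.2]; simp
    · rw [h] at h2; exact absurd h2 (by simp)

lemma foldl_altStep_true (j : Int) : ∀ (ws : List (Int × Int)) (st : PySem.Set Int × Bool),
    st.2 = false → (ws.foldl (altStep j) st).2 = true →
    st.1.length + 1 ≤ (ws.foldl (altStep j) st).1.length
  | [], st, h, h2 => by rw [List.foldl_nil] at h2; rw [h] at h2; exact absurd h2 (by simp)
  | w :: ws, st, h, h2 => by
    simp only [List.foldl_cons] at h2 ⊢
    by_cases hs : (altStep j st w).2 = true
    · have hl := altStep_true_length j st w h hs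
      have := (foldl_altStep_prefix j ws (altStep j st w)).length_le
      omega
    · have := foldl_altStep_true j ws (altStep j st w) (by simpa using hs) h2
      have hpre := (altStep_prefix j st w).length_le
      omega

lemma nodup_subset_length {m A : List Int} (hn : m.Nodup) (hs : ∀ x ∈ m, x ∈ A) :
    m.length ≤ A.length := by
  calc m.length = m.toFinset.card := (List.toFinset_card_of_nodup hn).symm
    _ ≤ A.toFinset.card := Finset.card_le_card (fun x hx => by
        simp only [List.mem_toFinset] at *; exact hs x hx)
    _ ≤ A.length := A.toFinset_card_le

def Aset (wires : List (Int × Int)) (i : Int) : List Int :=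
  i :: wires.flatMap (fun w => [w.1, w.2])

lemma length_Aset (wires : List (Int × Int)) (i : Int) :
    (Aset wires i).length = 2 * wires.length + 1 := by
  induction wires with
  | nil => simp [Aset]
  | cons w ws ih => simp [Aset] at ih ⊢; omega

lemma altLoop_prefix (wires : List (Int × Int)) (j : Int) :
    ∀ (fuel : Nat) (m : PySem.Set Int), m <+: altLoop wires j fuel m
  | 0, m => List.prefix_refl m
  | fuel + 1, m => by
    simp only [altLoop]
    split_ifs with h
    · exact (foldl_altStep_prefix j wires (m, false)).trans (altLoop_prefix wires j fuel _)
    · exact foldl_altStep_prefix j wires (m, false)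

lemma altLoop_sound (wires : List (Int × Int)) (j i : Int) :
    ∀ (fuel : Nat) (m : PySem.Set Int), (∀ y ∈ m, Reach wires j i y) →
    ∀ x ∈ altLoop wires j fuel m, Reach wires j i x
  | 0, m, hm => hm
  | fuel + 1, m, hm => by
    simp only [altLoop]
    have hs : ∀ y ∈ (wires.foldl (altStep j) (m, false)).1, Reach wires j i y :=
      foldl_altStep_sound j (Reach wires j i) wires (m, false) hm
        (fun w hw => ⟨fun ha hj => Reach.step w.1 w.2 ha (Or.inl (by simpa using hw)) hj,
                      fun ha hj => Reach.step w.2 w.1 ha (Or.inr (by simpa using hw)) hj⟩)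
    split_ifs with h
    · exact altLoop_sound wires j i fuel _ hs
    · exact hs

lemma altLoop_nodup (wires : List (Int × Int)) (j : Int) :
    ∀ (fuel : Nat) (m : PySem.Set Int), m.Nodup → (altLoop wires j fuel m).Nodup
  | 0, _, hm => hm
  | fuel + 1, m, hm => by
    simp only [altLoop]
    have := foldl_altStep_nodup j wires (m, false) hm
    split_ifs with h
    · exact altLoop_nodup wires j fuel _ this
    · exact this

lemma altLoop_closed (wires : List (Int × Int)) (j i : Int) :
    ∀ (fuel : Nat) (m : PySem.Set Int), m.Nodup → (∀ y ∈ m, y ∈ Aset wires i) →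
    2 * wires.length + 1 < fuel + m.length →
    Closed wires j (altLoop wires j fuel m)
  | 0, m, hnd, hsub, hlt => by
    exfalso
    have := nodup_subset_length hnd hsub
    rw [length_Aset] at this; omega
  | fuel + 1, m, hnd, hsub, hlt => by
    simp only [altLoop]
    split_ifs with h
    · have hlen : m.length + 1 ≤ (wires.foldl (altStep j) (m, false)).1.length :=
        foldl_altStep_true j wires (m, false) rfl h
      exact altLoop_closed wires j i fuel _
        (foldl_altStep_nodup j wires (m, false) hnd)
        (foldl_altStep_sound j (· ∈ Aset wires i) wires (m, false) hsub
          (fun w hw => ⟨fun _ _ => by simp [Aset]; right; exact ⟨w.1, w.2, hw, by simp⟩,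
                        fun _ _ => by simp [Aset]; right; exact ⟨w.1, w.2, hw, by simp⟩⟩))
        (by omega)
    · rw [(foldl_altStep_false j wires m (by simpa using h)).1]
      exact (foldl_altStep_false j wires m (by simpa using h)).2

lemma reach_self_eq (wires : List (Int × Int)) (j i : Int) (h : Reach wires j i j) : j = i := by
  cases h with
  | base => rfl
  | step a b _ _ hbj => exact absurd rfl hbj

def Mset (wires : List (Int × Int)) (j i : Int) : PySem.Set Int :=
  altLoop wires j (2 * wires.length + 1) (PySem.Set.ofList [i])

lemma Mset_spec (wires : List (Int × Int)) (j i : Int) :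
    (Mset wires j i).Nodup ∧ (∀ x, x ∈ Mset wires j i ↔ Reach wires j i x) := by
  have hofl : PySem.Set.ofList [i] = [i] := rfl
  have hnd : (Mset wires j i).Nodup :=
    altLoop_nodup wires j _ _ (by rw [hofl]; simp)
  have hi : i ∈ Mset wires j i :=
    (altLoop_prefix wires j _ _).subset (by rw [hofl]; simp)
  have hclosed : Closed wires j (Mset wires j i) :=
    altLoop_closed wires j i _ _ (by rw [hofl]; simp)
      (by rw [hofl]; intro y hy; simp at hy; subst hy; simp [Aset])
      (by rw [hofl]; simp)
  refine ⟨hnd, fun x => ⟨?_, ?_⟩⟩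
  · exact fun hx => altLoop_sound wires j i _ _
      (by rw [hofl]; intro y hy; simp at hy; subst hy; exact Reach.base) x hx
  · intro hr
    induction hr with
    | base => exact hi
    | step a b ha hadj hbj ih =>
      rcases hadj with hw | hw
      · rcases (hclosed (a, b) hw).1 ih with h | h
        · exact absurd h hbj
        · exact h
      · rcases (hclosed (b, a) hw).2 ih with h | h
        · exact absurd h hbj
        · exact h

lemma length_appendAt (g : List (List Int)) (i x : Int) :
    (appendAt g i x).length = g.length := by
  unfold appendAt; exact PySem.List.length_pySetD g i _

lemma pyGetD_appendAt (g : List (List Int)) (c a y : Int)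
    (hc : 0 ≤ c) (hcl : c < (g.length : Int)) (ha : 0 ≤ a) (hal : a < (g.length : Int)) :
    PySem.List.pyGetD (appendAt g c y) a [] =
      if a = c then PySem.List.pyGetD g a [] ++ [y] else PySem.List.pyGetD g a [] := by
  unfold appendAt
  rw [PySem.List.pySetD_of_nonneg g _ hc]
  rw [PySem.List.pyGetD_eq_getElem _ _ ha (by simpa using hal)]
  rw [List.getElem_set]
  rw [PySem.List.pyGetD_eq_getElem _ _ ha hal]
  by_cases h : a = c
  · subst h; rw [if_pos rfl, if_pos (by omega), PySem.List.pyGetD_eq_getElem _ _ hc hcl]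
  · rw [if_neg h, if_neg (by omega)]

lemma buildFold_mem (n : Int) : ∀ (ws : List (Int × Int)) (g : List (List Int)) (Q : Int → Int → Prop),
    g.length = (n + 1).toNat →
    (∀ w ∈ ws, 0 ≤ w.1 ∧ w.1 ≤ n ∧ 0 ≤ w.2 ∧ w.2 ≤ n) →
    (∀ a x, 0 ≤ a → a ≤ n → (x ∈ PySem.List.pyGetD g a [] ↔ Q a x)) →
    ∀ a x, 0 ≤ a → a ≤ n →
      (x ∈ PySem.List.pyGetD (ws.foldl (fun g w => appendAt (appendAt g w.1 w.2) w.2 w.1) g) a [] ↔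
        Q a x ∨ (a, x) ∈ ws ∨ (x, a) ∈ ws)
  | [], g, Q, _, _, hQ, a, x, ha, han => by
    simp only [List.foldl_nil, List.not_mem_nil, or_false]
    exact hQ a x ha han
  | w :: ws, g, Q, hlen, hws, hQ, a, x, ha, han => by
    obtain ⟨w1, w2⟩ := w
    have hw := hws (w1, w2) (by simp)
    simp only at hw
    have hlen1 : (appendAt g w1 w2).length = (n + 1).toNat := by rw [length_appendAt, hlen]
    have hlen2 : (appendAt (appendAt g w1 w2) w2 w1).length = (n + 1).toNat := by
      rw [length_appendAt, hlen1]
    have hL : ∀ b : Int, 0 ≤ b → b ≤ n → b < ((n + 1).toNat : Int) := by intro b h1 h2; omega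
    have hQ' : ∀ a x, 0 ≤ a → a ≤ n →
        (x ∈ PySem.List.pyGetD (appendAt (appendAt g w1 w2) w2 w1) a [] ↔
          (Q a x ∨ ((a, x) = (w1, w2) ∨ (x, a) = (w1, w2)))) := by
      intro a x ha han
      rw [pyGetD_appendAt _ _ _ _ hw.2.2.1 (by rw [hlen1]; exact hL _ hw.2.2.1 hw.2.2.2)
            ha (by rw [hlen1]; exact hL _ ha han)]
      rw [pyGetD_appendAt _ _ _ _ hw.1 (by rw [hlen]; exact hL _ hw.1 hw.2.1)
            ha (by rw [hlen]; exact hL _ ha han)]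
      have hmem := hQ a x ha han
      by_cases h1 : a = w1
      · subst h1
        by_cases h2 : a = w2
        · subst h2
          simp only [if_pos rfl]
          simp [hmem, Prod.ext_iff]
        · simp only [if_neg h2, if_pos rfl]
          simp [hmem, Prod.ext_iff, h2]
      · by_cases h2 : a = w2
        · subst h2
          simp only [if_pos rfl, if_neg h1]
          simp [hmem, Prod.ext_iff, h1]
        · simp only [if_neg h1, if_neg h2]
          simp [hmem, Prod.ext_iff, h1, h2]
    rw [List.foldl_cons]
    rw [buildFold_mem n ws _ _ hlen2 (fun v hv => hws v (by simp [hv])) hQ' a x ha han]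
    simp only [List.mem_cons, Prod.ext_iff]
    tauto

def Vis (v : List Int) (x : Int) : Prop := PySem.List.pyGetD v x 0 = 1

lemma visitFold_spec (L : Nat) : ∀ (rs : List Int) (r : Int) (pend v : List Int),
    v.length = L →
    (∀ x : Int, 0 ≤ x → x < (L : Int) → (PySem.List.pyGetD v x 0 = 0 ∨ PySem.List.pyGetD v x 0 = 1)) →
    (∀ x ∈ rs, 0 ≤ x ∧ x < (L : Int)) →
    ((rs.foldl visitStep (r, pend, v)).2.2.length = L ∧
     (∀ x : Int, 0 ≤ x → x < (L : Int) →
        (PySem.List.pyGetD (rs.foldl visitStep (r, pend, v)).2.2 x 0 = 0 ∨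
         PySem.List.pyGetD (rs.foldl visitStep (r, pend, v)).2.2 x 0 = 1)) ∧
     (∀ x : Int, 0 ≤ x → x < (L : Int) →
        (Vis (rs.foldl visitStep (r, pend, v)).2.2 x ↔ Vis v x ∨ x ∈ rs)) ∧
     (∀ q ∈ (rs.foldl visitStep (r, pend, v)).2.1, q ∈ pend ∨ (q ∈ rs ∧ ¬ Vis v q)) ∧
     pend <+: (rs.foldl visitStep (r, pend, v)).2.1 ∧
     (∀ x : Int, 0 ≤ x → x < (L : Int) → Vis (rs.foldl visitStep (r, pend, v)).2.2 x → ¬ Vis v x →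
        x ∈ (rs.foldl visitStep (r, pend, v)).2.1) ∧
     (rs.foldl visitStep (r, pend, v)).1 =
        r + (((rs.foldl visitStep (r, pend, v)).2.2.count 1 : Int) - (v.count 1 : Int)) ∧
     (rs.foldl visitStep (r, pend, v)).2.1.length + (rs.foldl visitStep (r, pend, v)).2.2.count 0 =
        pend.length + v.count 0)
  | [], r, pend, v, hlen, h01, _ => by
    refine ⟨hlen, h01, ?_, ?_, List.prefix_refl _, ?_, by simp, rfl⟩
    · intro x _ _; simp [Vis]
    · intro q hq; exact Or.inl hq
    · intro x _ _ h hn; exact absurd h hn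
  | x :: rs, r, pend, v, hlen, h01, hrs => by
    have hxr := hrs x (by simp)
    have hxlt : x.toNat < v.length := by rw [hlen]; omega
    by_cases hx : PySem.List.pyGetD v x 0 = 0
    · -- flip branch
      have hstep : visitStep (r, pend, v) x = (r + 1, pend ++ [x], PySem.List.pySetD v x 1) := by
        simp [visitStep, hx]
      have hset : PySem.List.pySetD v x 1 = v.set x.toNat 1 := PySem.List.pySetD_of_nonneg v 1 hxr.1
      have hgetv : PySem.List.pyGetD v x 0 = v[x.toNat] := PySem.List.pyGetD_eq_getElem v 0 hxr.1 (by omega)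
      have hvx0 : v[x.toNat] = 0 := by rw [← hgetv]; exact hx
      have hlen' : (PySem.List.pySetD v x 1).length = L := by rw [hset, List.length_set, hlen]
      have hget' : ∀ y : Int, 0 ≤ y → y < (L : Int) →
          PySem.List.pyGetD (PySem.List.pySetD v x 1) y 0 = if y = x then 1 else PySem.List.pyGetD v y 0 := by
        intro y hy hyL
        rw [hset, PySem.List.pyGetD_eq_getElem _ 0 hy (by rw [List.length_set]; omega),
            List.getElem_set, PySem.List.pyGetD_eq_getElem v 0 hy (by omega)]
        by_cases h : y = x
        · rw [if_pos (by omega), if_pos h]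
        · rw [if_neg (by omega), if_neg h]
      have h01' : ∀ y : Int, 0 ≤ y → y < (L : Int) →
          (PySem.List.pyGetD (PySem.List.pySetD v x 1) y 0 = 0 ∨ PySem.List.pyGetD (PySem.List.pySetD v x 1) y 0 = 1) := by
        intro y hy hyL; rw [hget' y hy hyL]
        by_cases h : y = x
        · rw [if_pos h]; right; rfl
        · rw [if_neg h]; exact h01 y hy hyL
      have hcount1 : (PySem.List.pySetD v x 1).count 1 = v.count 1 + 1 := by
        rw [hset, List.count_set hxlt, hvx0]; simp
      have hcount0 : (PySem.List.pySetD v x 1).count 0 + 1 = v.count 0 := by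
        rw [hset, List.count_set hxlt, hvx0]
        have hpos : 0 < v.count 0 := List.count_pos_iff.mpr (by rw [← hvx0]; exact v.getElem_mem hxlt)
        simp; omega
      obtain ⟨C1, C2, C3, C4, C5, C6, C7, C8⟩ :=
        visitFold_spec L rs (r + 1) (pend ++ [x]) (PySem.List.pySetD v x 1) hlen' h01' (fun y hy => hrs y (by simp [hy]))
      rw [List.foldl_cons, hstep]
      refine ⟨C1, C2, ?_, ?_, ?_, ?_, ?_, ?_⟩
      · intro y hy hyL
        rw [C3 y hy hyL]
        unfold Vis
        rw [hget' y hy hyL]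
        by_cases h : y = x
        · simp [h]
        · rw [if_neg h]; simp [h]
      · intro q hq
        rcases C4 q hq with hq' | ⟨hq', hnv⟩
        · rcases List.mem_append.mp hq' with h | h
          · exact Or.inl h
          · simp at h; subst h; exact Or.inr ⟨by simp, by simpa [Vis, hx] using hx ▸ (by simp [Vis, hx] : ¬ Vis v x)⟩
        · refine Or.inr ⟨by simp [hq'], ?_⟩
          intro hvq
          apply hnv
          unfold Vis at hvq ⊢
          have hqr := hrs q (by simp [hq'])
          rw [hget' q hqr.1 hqr.2]
          by_cases h : q = x
          · rw [if_pos h]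
          · rw [if_neg h]; exact hvq
      · exact (List.prefix_append pend [x]).trans C5
      · intro y hy hyL hvis hnvis
        by_cases hvy : Vis (PySem.List.pySetD v x 1) y
        · have : y = x := by
            unfold Vis at hvy
            rw [hget' y hy hyL] at hvy
            by_cases h : y = x
            · exact h
            · rw [if_neg h] at hvy; exact absurd hvy hnvis
          subst this
          exact C5.subset (by simp)
        · exact C6 y hy hyL hvis hvy
      · rw [C7, hcount1]; push_cast; ring
      · rw [C8]; simp; omega
    · -- already visited
      have hstep : visitStep (r, pend, v) x = (r, pend, v) := by simp [visitStep, hx]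
      have hvx1 : Vis v x := by
        rcases h01 x hxr.1 hxr.2 with h | h
        · exact absurd h hx
        · exact h
      obtain ⟨C1, C2, C3, C4, C5, C6, C7, C8⟩ :=
        visitFold_spec L rs r pend v hlen h01 (fun y hy => hrs y (by simp [hy]))
      rw [List.foldl_cons, hstep]
      refine ⟨C1, C2, ?_, ?_, C5, C6, C7, C8⟩
      · intro y hy hyL
        rw [C3 y hy hyL]
        constructor
        · rintro (h | h)
          · exact Or.inl h
          · exact Or.inr (by simp [h])
        · rintro (h | h)
          · exact Or.inl h
          · rcases List.mem_cons.mp h with rfl | h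
            · exact Or.inl hvx1
            · exact Or.inr h
      · intro q hq
        rcases C4 q hq with h | ⟨h1, h2⟩
        · exact Or.inl h
        · exact Or.inr ⟨by simp [h1], h2⟩

lemma reach_range (n : Int) (wires : List (Int × Int)) (j i : Int)
    (hwr : ∀ w ∈ wires, 0 ≤ w.1 ∧ w.1 ≤ n ∧ 0 ≤ w.2 ∧ w.2 ≤ n)
    (hi : 0 ≤ i ∧ i ≤ n) : ∀ x, Reach wires j i x → 0 ≤ x ∧ x ≤ n := by
  intro x hx
  induction hx with
  | base => exact hi
  | step a b _ hadj _ _ =>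
    rcases hadj with h | h
    · exact ⟨(hwr _ h).2.2.1, (hwr _ h).2.2.2⟩
    · exact ⟨(hwr _ h).1, (hwr _ h).2.1⟩

lemma vis_of_reach (n : Int) (wires : List (Int × Int)) (j i : Int)
    (hwr : ∀ w ∈ wires, 0 ≤ w.1 ∧ w.1 ≤ n ∧ 0 ≤ w.2 ∧ w.2 ≤ n)
    (hiN : 0 ≤ i ∧ i ≤ n) (v : List Int)
    (hexp0 : ∀ a : Int, 0 ≤ a → a ≤ n → Vis v a → (a = j ∧ a ≠ i) ∨ (∀ b, Adj wires a b → Vis v b))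
    (hvi : Vis v i) : ∀ x, Reach wires j i x → Vis v x := by
  intro x hx
  induction hx with
  | base => exact hvi
  | step a b ha hadj hbj ih =>
    have har := reach_range n wires j i hwr hiN a ha
    rcases hexp0 a har.1 har.2 ih with ⟨rfl, hne⟩ | h
    · exact absurd (reach_self_eq wires a i ha) hne
    · exact h b hadj

lemma bfsLoop_spec (n : Int) (wires : List (Int × Int)) (graph : List (List Int)) (j i : Int)
    (hG : ∀ a, 0 ≤ a → a ≤ n → ∀ x, (x ∈ PySem.List.pyGetD graph a [] ↔ Adj wires a x))
    (hwr : ∀ w ∈ wires, 0 ≤ w.1 ∧ w.1 ≤ n ∧ 0 ≤ w.2 ∧ w.2 ≤ n)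
    (hiN : 0 ≤ i ∧ i ≤ n) (hjN : 0 ≤ j ∧ j ≤ n) :
    ∀ (fuel : Nat) (que v : List Int) (r : Int),
    v.length = (n + 1).toNat →
    (∀ x : Int, 0 ≤ x → x ≤ n → (PySem.List.pyGetD v x 0 = 0 ∨ PySem.List.pyGetD v x 0 = 1)) →
    (∀ q ∈ que, 0 ≤ q ∧ q ≤ n) →
    (∀ q ∈ que, Vis v q) →
    (∀ q ∈ que, Reach wires j i q) →
    (∀ x : Int, 0 ≤ x → x ≤ n → Vis v x → x = j ∨ Reach wires j i x) →
    (∀ a : Int, 0 ≤ a → a ≤ n → Vis v a → a ∉ que →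
        (a = j ∧ a ≠ i) ∨ (∀ b, Adj wires a b → Vis v b)) →
    Vis v i → Vis v j →
    que.length + v.count 0 ≤ fuel →
    ((bfsLoop graph fuel que v r).1 =
        r + (((bfsLoop graph fuel que v r).2.count 1 : Int) - (v.count 1 : Int)) ∧
     (∀ x : Int, 0 ≤ x → x ≤ n →
        (Vis (bfsLoop graph fuel que v r).2 x ↔ x = j ∨ Reach wires j i x)) ∧
     (bfsLoop graph fuel que v r).2.length = (n + 1).toNat ∧
     (∀ x : Int, 0 ≤ x → x ≤ n →
        (PySem.List.pyGetD (bfsLoop graph fuel que v r).2 x 0 = 0 ∨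
         PySem.List.pyGetD (bfsLoop graph fuel que v r).2 x 0 = 1)))
  | fuel, [], v, r, hlen, h01, _, _, _, hvm, hexp, hvi, hvj, _ => by
    have hres : bfsLoop graph fuel [] v r = (r, v) := by cases fuel <;> rfl
    rw [hres]
    refine ⟨by push_cast; ring, ?_, hlen, h01⟩
    intro x hx hxn
    constructor
    · exact fun h => hvm x hx hxn h
    · have hexp0 : ∀ a : Int, 0 ≤ a → a ≤ n → Vis v a →
          (a = j ∧ a ≠ i) ∨ (∀ b, Adj wires a b → Vis v b) :=
        fun a h1 h2 h3 => hexp a h1 h2 h3 (by simp)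
      rintro (rfl | hr)
      · exact hvj
      · exact vis_of_reach n wires j i hwr hiN v hexp0 hvi x hr
  | 0, q :: rest, v, r, hlen, h01, hqr, hqv, hqm, hvm, hexp, hvi, hvj, hfuel => by
    exfalso; simp at hfuel
  | fuel + 1, q :: rest, v, r, hlen, h01, hqr, hqv, hqm, hvm, hexp, hvi, hvj, hfuel => by
    have hq := hqr q (by simp)
    have hL : ∀ b : Int, 0 ≤ b → b ≤ n → b < (((n + 1).toNat : Nat) : Int) := by
      intro b h1 h2; omega
    have hadjr : ∀ a b : Int, Adj wires a b → (0 ≤ b ∧ b ≤ n) := by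
      intro a b hadj
      rcases hadj with h | h
      · exact ⟨(hwr _ h).2.2.1, (hwr _ h).2.2.2⟩
      · exact ⟨(hwr _ h).1, (hwr _ h).2.1⟩
    have hrow : ∀ x ∈ PySem.List.pyGetD graph q [], Adj wires q x :=
      fun x hx => (hG q hq.1 hq.2 x).mp hx
    have hrowr : ∀ x ∈ PySem.List.pyGetD graph q [], 0 ≤ x ∧ x < (((n + 1).toNat : Nat) : Int) := by
      intro x hx
      have := hadjr q x (hrow x hx)
      exact ⟨this.1, hL x this.1 this.2⟩
    have h01' : ∀ x : Int, 0 ≤ x → x < (((n + 1).toNat : Nat) : Int) →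
        (PySem.List.pyGetD v x 0 = 0 ∨ PySem.List.pyGetD v x 0 = 1) := by
      intro x h1 h2; exact h01 x h1 (by omega)
    obtain ⟨C1, C2, C3, C4, C5, C6, C7, C8⟩ :=
      visitFold_spec (n + 1).toNat (PySem.List.pyGetD graph q []) r rest v hlen h01' hrowr
    set st := (PySem.List.pyGetD graph q []).foldl visitStep (r, rest, v) with hst
    have hres : bfsLoop graph (fuel + 1) (q :: rest) v r = bfsLoop graph fuel st.2.1 st.2.2 st.1 := rfl
    have hvmono : ∀ x : Int, 0 ≤ x → x ≤ n → Vis v x → Vis st.2.2 x := by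
      intro x h1 h2 h3
      exact (C3 x h1 (hL x h1 h2)).mpr (Or.inl h3)
    have hqReach : Reach wires j i q := hqm q (by simp)
    have hrowReach : ∀ x ∈ PySem.List.pyGetD graph q [], x ≠ j → Reach wires j i x :=
      fun x hx hxj => Reach.step q x hqReach (hrow x hx) hxj
    have hIH := bfsLoop_spec n wires graph j i hG hwr hiN hjN fuel st.2.1 st.2.2 st.1
      C1
      (fun x h1 h2 => C2 x h1 (hL x h1 h2))
      (by
        intro p hp
        rcases C4 p hp with h | ⟨h, _⟩
        · exact hqr p (by simp [h])
        · have := hadjr q p (hrow p h); exact this)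
      (by
        intro p hp
        rcases C4 p hp with h | ⟨h, _⟩
        · have hpr := hqr p (by simp [h])
          exact hvmono p hpr.1 hpr.2 (hqv p (by simp [h]))
        · have hpr := hrowr p h
          exact (C3 p hpr.1 hpr.2).mpr (Or.inr h))
      (by
        intro p hp
        rcases C4 p hp with h | ⟨h, hnv⟩
        · exact hqm p (by simp [h])
        · refine hrowReach p h ?_
          intro hpj; subst hpj; exact hnv hvj)
      (by
        intro x h1 h2 h3
        rcases (C3 x h1 (hL x h1 h2)).mp h3 with h | h
        · exact hvm x h1 h2 h
        · by_cases hxj : x = j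
          · exact Or.inl hxj
          · exact Or.inr (hrowReach x h hxj))
      (by
        intro a h1 h2 hva hnq
        by_cases haq : a = q
        · subst haq
          right
          intro b hadj
          have hbr := hadjr a b hadj
          exact (C3 b hbr.1 (hL b hbr.1 hbr.2)).mpr (Or.inr ((hG a hq.1 hq.2 b).mpr hadj))
        · have hnrest : a ∉ rest := fun h => hnq (C5.subset h)
          by_cases hva0 : Vis v a
          · rcases hexp a h1 h2 hva0 (by simp [haq, hnrest]) with h | h
            · exact Or.inl h
            · right
              intro b hadj
              have hbr := hadjr a b hadj
              exact hvmono b hbr.1 hbr.2 (h b hadj)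
          · exact absurd (C6 a h1 (hL a h1 h2) hva hva0) hnq)
      (hvmono i hiN.1 hiN.2 hvi)
      (hvmono j hjN.1 hjN.2 hvj)
      (by
        have : rest.length + v.count 0 ≤ fuel := by simp at hfuel; omega
        omega)
    rw [hres]
    refine ⟨?_, hIH.2.1, hIH.2.2.1, hIH.2.2.2⟩
    rw [hIH.1, C7]
    push_cast
    ring

lemma count_one_filter : ∀ v : List Int,
    v.count 1 = ((Finset.range v.length).filter (fun k => v.getD k 0 = 1)).card := by
  intro v
  induction v using List.reverseRecOn with
  | nil => simp
  | append_singleton xs x ih =>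
    rw [List.count_append, List.length_append]
    have hr : Finset.range (xs.length + 1) = insert xs.length (Finset.range xs.length) := by
      rw [Finset.range_add_one]
    simp only [List.length_singleton, hr, Finset.filter_insert]
    have hget : ∀ k, k < xs.length → (xs ++ [x]).getD k 0 = xs.getD k 0 := by
      intro k hk
      rw [List.getD_eq_getElem _ _ (by simp; omega), List.getD_eq_getElem _ _ hk,
          List.getElem_append_left hk]
    have hfeq : (Finset.range xs.length).filter (fun k => (xs ++ [x]).getD k 0 = 1) =
        (Finset.range xs.length).filter (fun k => xs.getD k 0 = 1) := by
      apply Finset.filter_congr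
      intro k hk
      rw [Finset.mem_range] at hk
      rw [hget k hk]
    have hgetlast : (xs ++ [x]).getD xs.length 0 = x := by
      rw [List.getD_eq_getElem _ _ (by simp)]
      simp
    rw [hfeq, ih, hgetlast]
    by_cases hx1 : x = 1
    · rw [if_pos hx1, Finset.card_insert_of_notMem (by simp)]
      simp [hx1, List.count_singleton]
    · rw [if_neg hx1]
      simp [List.count_singleton]
      omega

lemma count_eq_of_char (L : Nat) (v : List Int) (S : List Int) (hlen : v.length = L)
    (hS : S.Nodup) (hSr : ∀ x ∈ S, 0 ≤ x ∧ x < (L : Int))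
    (hchar : ∀ x : Int, 0 ≤ x → x < (L : Int) → (Vis v x ↔ x ∈ S)) :
    v.count 1 = S.length := by
  rw [count_one_filter, hlen]
  rw [← List.toFinset_card_of_nodup hS]
  apply Finset.card_nbij' (i := fun (k : Nat) => (k : Int)) (j := fun (x : Int) => x.toNat)
  · intro k hk
    simp only [Finset.coe_filter, Set.mem_setOf_eq, Finset.mem_range] at hk
    have : Vis v (k : Int) := by
      unfold Vis; rw [PySem.List.pyGetD_natCast]; exact hk.2
    simp only [List.coe_toFinset, Set.mem_setOf_eq]
    exact (hchar (k : Int) (by omega) (by exact_mod_cast hk.1)).mp this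
  · intro x hx
    simp only [List.coe_toFinset, Set.mem_setOf_eq] at hx
    have hr := hSr x hx
    simp only [Finset.coe_filter, Set.mem_setOf_eq, Finset.mem_range]
    constructor
    · omega
    · have : Vis v x := (hchar x hr.1 hr.2).mpr hx
      unfold Vis at this
      rw [show x = ((x.toNat : Nat) : Int) by omega, PySem.List.pyGetD_natCast] at this
      exact this
  · intro k _; simp
  · intro x hx
    simp only [List.coe_toFinset, Set.mem_setOf_eq] at hx
    have hr := hSr x hx
    simp; omega

lemma pyGetD_pySetD_int {α : Type} (v : List α) (c : Int) (y : α) (x : Int) (d : α)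
    (hc : 0 ≤ c) (hcl : c < (v.length : Int)) (hx : 0 ≤ x) (hxl : x < (v.length : Int)) :
    PySem.List.pyGetD (PySem.List.pySetD v c y) x d =
      if x = c then y else PySem.List.pyGetD v x d := by
  rw [PySem.List.pySetD_of_nonneg v y hc]
  rw [PySem.List.pyGetD_eq_getElem _ d hx (by rw [List.length_set]; omega)]
  rw [List.getElem_set]
  by_cases h : x = c
  · rw [if_pos (by omega), if_pos h]
  · rw [if_neg (by omega), if_neg h, PySem.List.pyGetD_eq_getElem v d hx hxl]

lemma mem_buildG (n : Int) (wires : List (Int × Int))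
    (hwr : ∀ w ∈ wires, 0 ≤ w.1 ∧ w.1 ≤ n ∧ 0 ≤ w.2 ∧ w.2 ≤ n) :
    ∀ a, 0 ≤ a → a ≤ n → ∀ x, (x ∈ PySem.List.pyGetD (buildG n wires) a [] ↔ Adj wires a x) := by
  intro a ha han x
  have h0 : ((List.range (n + 1).toNat).map fun _ => ([] : List Int)).length = (n + 1).toNat := by
    simp
  have hinit : ∀ a x : Int, 0 ≤ a → a ≤ n →
      (x ∈ PySem.List.pyGetD ((List.range (n + 1).toNat).map fun _ => ([] : List Int)) a [] ↔ False) := by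
    intro a x ha han
    rw [PySem.List.pyGetD_eq_getElem _ _ ha (by rw [h0]; omega)]
    simp
  have := buildFold_mem n wires _ (fun _ _ => False) h0 hwr hinit a x ha han
  unfold buildG
  rw [this]
  simp [Adj]

lemma bfs_eq (n : Int) (wires : List (Int × Int))
    (hwr : ∀ w ∈ wires, 0 ≤ w.1 ∧ w.1 ≤ n ∧ 0 ≤ w.2 ∧ w.2 ≤ n)
    (i j : Int) (hij : (i, j) ∈ wires) (graph : List (List Int))
    (hG : ∀ a, 0 ≤ a → a ≤ n → ∀ x, (x ∈ PySem.List.pyGetD graph a [] ↔ Adj wires a x)) :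
    bfs i (PySem.List.pySetD (List.replicate (n + 1).toNat (0 : Int)) j 1) graph =
      ((Mset wires j i).length : Int) := by
  have hir : 0 ≤ i ∧ i ≤ n := ⟨(hwr _ hij).1, (hwr _ hij).2.1⟩
  have hjr : 0 ≤ j ∧ j ≤ n := ⟨(hwr _ hij).2.2.1, (hwr _ hij).2.2.2⟩
  have hn : 0 ≤ n := le_trans hir.1 hir.2
  set L := (n + 1).toNat with hL
  have hLn : (L : Int) = n + 1 := by omega
  set v0 := PySem.List.pySetD (List.replicate L (0 : Int)) j 1 with hv0
  have hlen0 : v0.length = L := by rw [hv0, PySem.List.length_pySetD, List.length_replicate]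
  set v1 := PySem.List.pySetD v0 i 1 with hv1
  have hlen1 : v1.length = L := by rw [hv1, PySem.List.length_pySetD, hlen0]
  have hrep : ∀ x : Int, 0 ≤ x → x ≤ n →
      PySem.List.pyGetD (List.replicate L (0 : Int)) x 0 = 0 := by
    intro x h1 h2
    rw [PySem.List.pyGetD_eq_getElem _ 0 h1 (by rw [List.length_replicate]; omega)]
    simp
  have hv1get : ∀ x : Int, 0 ≤ x → x ≤ n →
      PySem.List.pyGetD v1 x 0 = if x = i then 1 else if x = j then 1 else 0 := by
    intro x h1 h2
    rw [hv1, pyGetD_pySetD_int _ _ _ _ _ hir.1 (by rw [hlen0]; omega) h1 (by rw [hlen0]; omega)]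
    by_cases hxi : x = i
    · rw [if_pos hxi, if_pos hxi]
    · rw [if_neg hxi, if_neg hxi, hv0,
        pyGetD_pySetD_int _ _ _ _ _ hjr.1 (by rw [List.length_replicate]; omega) h1
          (by rw [List.length_replicate]; omega)]
      by_cases hxj : x = j
      · rw [if_pos hxj, if_pos hxj]
      · rw [if_neg hxj, if_neg hxj, hrep x h1 h2]
  obtain ⟨hMnd, hMmem⟩ := Mset_spec wires j i
  set M := Mset wires j i with hM
  have hjM : j ∈ M ↔ j = i := by
    rw [hMmem j]
    constructor
    · exact fun h => reach_self_eq wires j i h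
    · rintro rfl; exact Reach.base
  have hspec := bfsLoop_spec n wires graph j i hG hwr hir hjr (v0.length + 1) [i] v1 1
    hlen1
    (by
      intro x h1 h2; rw [hv1get x h1 h2]
      by_cases hxi : x = i
      · simp [hxi]
      · by_cases hxj : x = j <;> simp [hxi, hxj])
    (by intro q hq; simp at hq; rw [hq]; exact hir)
    (by intro q hq; simp at hq; unfold Vis; rw [hq, hv1get i hir.1 hir.2]; simp)
    (by intro q hq; simp at hq; rw [hq]; exact Reach.base)
    (by
      intro x h1 h2 hvx
      unfold Vis at hvx; rw [hv1get x h1 h2] at hvx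
      by_cases hxi : x = i
      · exact Or.inr (hxi ▸ Reach.base)
      · rw [if_neg hxi] at hvx
        by_cases hxj : x = j
        · exact Or.inl hxj
        · rw [if_neg hxj] at hvx; exact absurd hvx (by norm_num))
    (by
      intro a h1 h2 hva hnq
      simp at hnq
      unfold Vis at hva; rw [hv1get a h1 h2] at hva
      rw [if_neg hnq] at hva
      by_cases haj : a = j
      · exact Or.inl ⟨haj, hnq⟩
      · rw [if_neg haj] at hva; exact absurd hva (by norm_num))
    (by unfold Vis; rw [hv1get i hir.1 hir.2]; simp)
    (by
      unfold Vis; rw [hv1get j hjr.1 hjr.2]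
      by_cases hji : j = i <;> simp [hji])
    (by
      have := List.count_le_length (l := v1) (a := (0 : Int))
      simp only [List.length_singleton]
      omega)
  unfold bfs
  rw [← hv1]
  set res := bfsLoop graph (v0.length + 1) [i] v1 1 with hres
  obtain ⟨hR, hchar, hlenf, _⟩ := hspec
  have hMr : ∀ x ∈ M, 0 ≤ x ∧ x < (L : Int) := by
    intro x hx
    have := reach_range n wires j i hwr hir x ((hMmem x).mp hx)
    omega
  have hcharL : ∀ x : Int, 0 ≤ x → x < (L : Int) → (Vis res.2 x ↔ x ∈ (if j ∈ M then M else j :: M)) := by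
    intro x h1 h2
    rw [hchar x h1 (by omega)]
    by_cases hjm : j ∈ M
    · rw [if_pos hjm]
      rw [hMmem x]
      constructor
      · rintro (h | h)
        · rw [h]; exact (hMmem j).mp hjm
        · exact h
      · exact fun h => Or.inr h
    · rw [if_neg hjm, List.mem_cons, hMmem x]
  have hcount1 : res.2.count 1 = (if j ∈ M then M else j :: M).length := by
    apply count_eq_of_char L res.2 _ hlenf
    · by_cases hjm : j ∈ M
      · rw [if_pos hjm]; exact hMnd
      · rw [if_neg hjm]; exact List.nodup_cons.mpr ⟨hjm, hMnd⟩
    · intro x hx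
      by_cases hjm : j ∈ M
      · rw [if_pos hjm] at hx; exact hMr x hx
      · rw [if_neg hjm] at hx
        rcases List.mem_cons.mp hx with rfl | hx
        · constructor
          · exact hjr.1
          · omega
        · exact hMr x hx
    · exact hcharL
  have hcount0 : v1.count 1 = (if j = i then [i] else [i, j]).length := by
    apply count_eq_of_char L v1 _ hlen1
    · by_cases hji : j = i
      · rw [if_pos hji]; simp
      · rw [if_neg hji]; simp [List.nodup_cons]; omega
    · intro x hx
      by_cases hji : j = i
      · rw [if_pos hji] at hx; simp at hx; subst hx; exact ⟨hir.1, by omega⟩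
      · rw [if_neg hji] at hx
        simp at hx
        rcases hx with rfl | rfl
        · exact ⟨hir.1, by omega⟩
        · exact ⟨hjr.1, by omega⟩
    · intro x h1 h2
      unfold Vis
      rw [hv1get x h1 (by omega)]
      by_cases hji : j = i
      · rw [if_pos hji]
        by_cases hxi : x = i <;> simp [hxi, hji]
      · rw [if_neg hji]
        by_cases hxi : x = i
        · simp [hxi]
        · by_cases hxj : x = j <;> simp [hxi, hxj]
  rw [hR, hcount1, hcount0]
  by_cases hji : j = i
  · rw [if_pos ((hjM.mpr hji)), if_pos hji]
    simp
  · rw [if_neg (fun h => hji (hjM.mp h)), if_neg hji]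
    simp
    push_cast
    ring

-- ---- wrap layer: A resolves a label x in [-(n+1), n] to the index wrapL n x ----

def wrapL (n x : Int) : Int := if x < 0 then x + (n + 1) else x

lemma wrap_range (n x : Int) (h1 : -(n + 1) ≤ x) (h2 : x ≤ n) :
    0 ≤ wrapL n x ∧ wrapL n x ≤ n := by
  unfold wrapL; split_ifs <;> omega

lemma wrap_eq_of_nonneg (n x : Int) (h : 0 ≤ x) : wrapL n x = x := if_neg (by omega)

lemma pyIdx_wrap (L : Nat) (n x : Int) (hL : (L : Int) = n + 1)
    (h1 : -(n + 1) ≤ x) (h2 : x ≤ n) :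
    PySem.List.pyIdx? L x = some ((wrapL n x).toNat) := by
  unfold PySem.List.pyIdx? wrapL
  split_ifs
  all_goals first
    | (exfalso; omega)
    | (congr 1 <;> omega)

lemma pyGet?_wrap {α : Type} (v : List α) (n x : Int) (hlen : (v.length : Int) = n + 1)
    (h1 : -(n + 1) ≤ x) (h2 : x ≤ n) :
    PySem.List.pyGet? v x = PySem.List.pyGet? v (wrapL n x) := by
  have hw := wrap_range n x h1 h2
  unfold PySem.List.pyGet?
  rw [pyIdx_wrap v.length n x hlen h1 h2,
      pyIdx_wrap v.length n (wrapL n x) hlen (by omega) hw.2,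
      wrap_eq_of_nonneg n _ hw.1]

lemma pyGetD_wrap {α : Type} (v : List α) (n x : Int) (d : α) (hlen : (v.length : Int) = n + 1)
    (h1 : -(n + 1) ≤ x) (h2 : x ≤ n) :
    PySem.List.pyGetD v x d = PySem.List.pyGetD v (wrapL n x) d := by
  unfold PySem.List.pyGetD
  rw [pyGet?_wrap v n x hlen h1 h2]

lemma pySetD_wrap {α : Type} (v : List α) (n x : Int) (y : α) (hlen : (v.length : Int) = n + 1)
    (h1 : -(n + 1) ≤ x) (h2 : x ≤ n) :
    PySem.List.pySetD v x y = PySem.List.pySetD v (wrapL n x) y := by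
  have hw := wrap_range n x h1 h2
  unfold PySem.List.pySetD PySem.List.pySet?
  rw [pyIdx_wrap v.length n x hlen h1 h2,
      pyIdx_wrap v.length n (wrapL n x) hlen (by omega) hw.2,
      wrap_eq_of_nonneg n _ hw.1]

def wrapW (n : Int) (w : Int × Int) : Int × Int := (wrapL n w.1, wrapL n w.2)

lemma appendAt_wrap (n : Int) (g g' : List (List Int)) (c y : Int)
    (hlg : (g.length : Int) = n + 1) (hlg' : (g'.length : Int) = n + 1)
    (hc1 : -(n + 1) ≤ c) (hc2 : c ≤ n)
    (hrel : ∀ a : Int, 0 ≤ a → a ≤ n →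
      PySem.List.pyGetD g' a [] = (PySem.List.pyGetD g a []).map (wrapL n)) :
    ∀ a : Int, 0 ≤ a → a ≤ n →
      PySem.List.pyGetD (appendAt g' (wrapL n c) (wrapL n y)) a []
        = (PySem.List.pyGetD (appendAt g c y) a []).map (wrapL n) := by
  intro a ha han
  have hw := wrap_range n c hc1 hc2
  unfold appendAt
  rw [pySetD_wrap g n c _ hlg hc1 hc2, pyGetD_wrap g n c [] hlg hc1 hc2]
  rw [pyGetD_pySetD_int g' (wrapL n c) _ a [] hw.1 (by omega) ha (by omega)]
  rw [pyGetD_pySetD_int g (wrapL n c) _ a [] hw.1 (by omega) ha (by omega)]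
  by_cases h : a = wrapL n c
  · rw [if_pos h, if_pos h, hrel (wrapL n c) hw.1 hw.2]
    rw [List.map_append]
    rfl
  · rw [if_neg h, if_neg h, hrel a ha han]

lemma length_buildFold : ∀ (ws : List (Int × Int)) (g : List (List Int)),
    (ws.foldl (fun g w => appendAt (appendAt g w.1 w.2) w.2 w.1) g).length = g.length
  | [], _ => rfl
  | w :: ws, g => by
    rw [List.foldl_cons, length_buildFold ws _, length_appendAt, length_appendAt]

lemma buildFold_wrap (n : Int) : ∀ (ws : List (Int × Int)) (g g' : List (List Int)),
    (g.length : Int) = n + 1 → (g'.length : Int) = n + 1 →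
    (∀ w ∈ ws, -(n + 1) ≤ w.1 ∧ w.1 ≤ n ∧ -(n + 1) ≤ w.2 ∧ w.2 ≤ n) →
    (∀ a : Int, 0 ≤ a → a ≤ n →
      PySem.List.pyGetD g' a [] = (PySem.List.pyGetD g a []).map (wrapL n)) →
    ∀ a : Int, 0 ≤ a → a ≤ n →
      PySem.List.pyGetD
        ((ws.map (wrapW n)).foldl (fun g w => appendAt (appendAt g w.1 w.2) w.2 w.1) g') a []
        = (PySem.List.pyGetD
            (ws.foldl (fun g w => appendAt (appendAt g w.1 w.2) w.2 w.1) g) a []).map (wrapL n)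
  | [], g, g', _, _, _, hrel => hrel
  | w :: ws, g, g', hlg, hlg', hws, hrel => by
    have hw := hws w (by simp)
    have hl1 : ((appendAt g w.1 w.2).length : Int) = n + 1 := by rw [length_appendAt]; exact hlg
    have hl1' : ((appendAt g' (wrapL n w.1) (wrapL n w.2)).length : Int) = n + 1 := by
      rw [length_appendAt]; exact hlg'
    have hrel1 := appendAt_wrap n g g' w.1 w.2 hlg hlg' hw.1 hw.2.1 hrel
    have hrel2 := appendAt_wrap n (appendAt g w.1 w.2) (appendAt g' (wrapL n w.1) (wrapL n w.2))
      w.2 w.1 hl1 hl1' hw.2.2.1 hw.2.2.2 hrel1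
    have hl2 : ((appendAt (appendAt g w.1 w.2) w.2 w.1).length : Int) = n + 1 := by
      rw [length_appendAt]; exact hl1
    have hl2' : ((appendAt (appendAt g' (wrapL n w.1) (wrapL n w.2)) (wrapL n w.2) (wrapL n w.1)).length : Int) = n + 1 := by
      rw [length_appendAt]; exact hl1'
    simp only [List.map_cons, List.foldl_cons]
    exact buildFold_wrap n ws _ _ hl2 hl2' (fun v hv => hws v (by simp [hv])) hrel2

lemma appendAt_rows {P : Int → Prop} (g : List (List Int)) (c y : Int)
    (hg : ∀ (a : Int), ∀ x ∈ PySem.List.pyGetD g a [], P x) (hy : P y) :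
    ∀ (a : Int), ∀ x ∈ PySem.List.pyGetD (appendAt g c y) a [], P x := by
  intro a x hx
  unfold appendAt PySem.List.pySetD PySem.List.pySet? at hx
  cases hidx : PySem.List.pyIdx? g.length c with
  | none => rw [hidx] at hx; exact hg a x hx
  | some k =>
    rw [hidx] at hx
    simp only [Option.map_some, Option.getD_some] at hx
    unfold PySem.List.pyGetD PySem.List.pyGet? at hx
    rw [List.length_set] at hx
    cases hidx2 : PySem.List.pyIdx? g.length a with
    | none => rw [hidx2] at hx; simp at hx
    | some m =>
      rw [hidx2] at hx
      simp only [Option.bind_some] at hx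
      rw [List.getElem?_set] at hx
      by_cases hkm : k = m
      · rw [if_pos hkm] at hx
        by_cases hklen : k < g.length
        · rw [if_pos hklen] at hx
          simp only [Option.getD_some] at hx
          rcases List.mem_append.mp hx with h | h
          · exact hg c x h
          · simp at h; subst h; exact hy
        · rw [if_neg hklen] at hx; simp at hx
      · rw [if_neg hkm] at hx
        have : x ∈ PySem.List.pyGetD g a [] := by
          unfold PySem.List.pyGetD PySem.List.pyGet?
          rw [hidx2]
          simpa using hx
        exact hg a x this

lemma buildFold_rows {P : Int → Prop} : ∀ (ws : List (Int × Int)) (g : List (List Int)),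
    (∀ (a : Int), ∀ x ∈ PySem.List.pyGetD g a [], P x) →
    (∀ w ∈ ws, P w.1 ∧ P w.2) →
    ∀ (a : Int), ∀ x ∈ PySem.List.pyGetD
      (ws.foldl (fun g w => appendAt (appendAt g w.1 w.2) w.2 w.1) g) a [], P x
  | [], _, hg, _ => hg
  | w :: ws, g, hg, hws => by
    have h1 := appendAt_rows g w.1 w.2 hg (hws w (by simp)).2
    have h2 := appendAt_rows _ w.2 w.1 h1 (hws w (by simp)).1
    simpa using buildFold_rows ws _ h2 (fun v hv => hws v (by simp [hv]))

lemma init_rows (L : Nat) (a : Int) :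
    PySem.List.pyGetD ((List.range L).map fun _ => ([] : List Int)) a [] = [] := by
  unfold PySem.List.pyGetD PySem.List.pyGet?
  cases hidx : PySem.List.pyIdx? ((List.range L).map fun _ => ([] : List Int)).length a with
  | none => rfl
  | some m =>
    simp only [Option.bind_some]
    rw [List.getElem?_map]
    cases (List.range L)[m]? <;> rfl

lemma visitFold_len : ∀ (rs : List Int) (r : Int) (pend v : List Int),
    (rs.foldl visitStep (r, pend, v)).2.2.length = v.length
  | [], _, _, _ => rfl
  | x :: rs, r, pend, v => by
    rw [List.foldl_cons]
    by_cases h : PySem.List.pyGetD v x 0 = 0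
    · rw [show visitStep (r, pend, v) x
          = (r + 1, pend ++ [x], PySem.List.pySetD v x 1) by simp [visitStep, h]]
      rw [visitFold_len rs _ _ _]; exact PySem.List.length_pySetD v x 1
    · rw [show visitStep (r, pend, v) x = (r, pend, v) by simp [visitStep, h]]
      exact visitFold_len rs r pend v

lemma visitFold_pend : ∀ (rs : List Int) (r : Int) (pend v : List Int) (q : Int),
    q ∈ (rs.foldl visitStep (r, pend, v)).2.1 → q ∈ pend ∨ q ∈ rs
  | [], _, _, _, q, hq => Or.inl hq
  | x :: rs, r, pend, v, q, hq => by
    rw [List.foldl_cons] at hq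
    by_cases h : PySem.List.pyGetD v x 0 = 0
    · rw [show visitStep (r, pend, v) x
          = (r + 1, pend ++ [x], PySem.List.pySetD v x 1) by simp [visitStep, h]] at hq
      rcases visitFold_pend rs _ _ _ q hq with h' | h'
      · rcases List.mem_append.mp h' with h'' | h''
        · exact Or.inl h''
        · simp at h''; subst h''; exact Or.inr (by simp)
      · exact Or.inr (by simp [h'])
    · rw [show visitStep (r, pend, v) x = (r, pend, v) by simp [visitStep, h]] at hq
      rcases visitFold_pend rs _ _ _ q hq with h' | h'
      · exact Or.inl h'
      · exact Or.inr (by simp [h'])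

lemma visitFold_wrap (n : Int) : ∀ (rs : List Int) (r : Int) (pend v : List Int),
    (v.length : Int) = n + 1 →
    (∀ x ∈ rs, -(n + 1) ≤ x ∧ x ≤ n) →
    ((rs.map (wrapL n)).foldl visitStep (r, pend.map (wrapL n), v)).1
        = (rs.foldl visitStep (r, pend, v)).1 ∧
    ((rs.map (wrapL n)).foldl visitStep (r, pend.map (wrapL n), v)).2.1
        = ((rs.foldl visitStep (r, pend, v)).2.1).map (wrapL n) ∧
    ((rs.map (wrapL n)).foldl visitStep (r, pend.map (wrapL n), v)).2.2
        = (rs.foldl visitStep (r, pend, v)).2.2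
  | [], _, _, _, _, _ => ⟨rfl, rfl, rfl⟩
  | x :: rs, r, pend, v, hlen, hrs => by
    have hx := hrs x (by simp)
    simp only [List.map_cons, List.foldl_cons]
    have hget := pyGetD_wrap v n x 0 hlen hx.1 hx.2
    have hset := pySetD_wrap v n x 1 hlen hx.1 hx.2
    unfold visitStep
    by_cases h : PySem.List.pyGetD v x 0 = 0
    · rw [if_pos (by rw [← hget]; exact h), if_pos h, ← hset]
      have : (pend.map (wrapL n)) ++ [wrapL n x] = (pend ++ [x]).map (wrapL n) := by
        rw [List.map_append]; rfl
      rw [this]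
      exact visitFold_wrap n rs (r + 1) (pend ++ [x]) (PySem.List.pySetD v x 1)
        (by rw [PySem.List.length_pySetD]; exact hlen) (fun y hy => hrs y (by simp [hy]))
    · rw [if_neg (by rw [← hget]; exact h), if_neg h]
      exact visitFold_wrap n rs r pend v hlen (fun y hy => hrs y (by simp [hy]))

lemma bfsLoop_wrap (n : Int) (graph graph' : List (List Int))
    (hlg : (graph.length : Int) = n + 1)
    (hGrel : ∀ a : Int, 0 ≤ a → a ≤ n →
      PySem.List.pyGetD graph' a [] = (PySem.List.pyGetD graph a []).map (wrapL n))
    (hGraw : ∀ (a : Int), ∀ x ∈ PySem.List.pyGetD graph a [], -(n + 1) ≤ x ∧ x ≤ n) :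
    ∀ (fuel : Nat) (que v : List Int) (r : Int), (v.length : Int) = n + 1 →
    (∀ q ∈ que, -(n + 1) ≤ q ∧ q ≤ n) →
    (bfsLoop graph' fuel (que.map (wrapL n)) v r).1 = (bfsLoop graph fuel que v r).1 ∧
    (bfsLoop graph' fuel (que.map (wrapL n)) v r).2 = (bfsLoop graph fuel que v r).2
  | 0, _, _, _, _, _ => ⟨rfl, rfl⟩
  | fuel + 1, [], v, r, _, _ => ⟨rfl, rfl⟩
  | fuel + 1, q :: rest, v, r, hlen, hque => by
    have hq := hque q (by simp)
    have hwq := wrap_range n q hq.1 hq.2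
    have hrowq : PySem.List.pyGetD graph q [] = PySem.List.pyGetD graph (wrapL n q) [] :=
      pyGetD_wrap graph n q [] hlg hq.1 hq.2
    have hrow' : PySem.List.pyGetD graph' (wrapL n q) []
        = (PySem.List.pyGetD graph q []).map (wrapL n) := by
      rw [hGrel (wrapL n q) hwq.1 hwq.2, ← hrowq]
    obtain ⟨V1, V2, V3⟩ := visitFold_wrap n (PySem.List.pyGetD graph q []) r rest v hlen
      (fun x hx => hGraw q x hx)
    have hres : bfsLoop graph' (fuel + 1) ((q :: rest).map (wrapL n)) v r
        = bfsLoop graph' fuel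
            (((PySem.List.pyGetD graph q []).map (wrapL n)).foldl visitStep
              (r, rest.map (wrapL n), v)).2.1
            (((PySem.List.pyGetD graph q []).map (wrapL n)).foldl visitStep
              (r, rest.map (wrapL n), v)).2.2
            (((PySem.List.pyGetD graph q []).map (wrapL n)).foldl visitStep
              (r, rest.map (wrapL n), v)).1 := by
      simp only [List.map_cons]
      show bfsLoop graph' (fuel + 1) (wrapL n q :: rest.map (wrapL n)) v r = _
      rw [show bfsLoop graph' (fuel + 1) (wrapL n q :: rest.map (wrapL n)) v r
          = bfsLoop graph' fuel
              ((PySem.List.pyGetD graph' (wrapL n q) []).foldl visitStep (r, rest.map (wrapL n), v)).2.1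
              ((PySem.List.pyGetD graph' (wrapL n q) []).foldl visitStep (r, rest.map (wrapL n), v)).2.2
              ((PySem.List.pyGetD graph' (wrapL n q) []).foldl visitStep (r, rest.map (wrapL n), v)).1
        from rfl]
      rw [hrow']
    rw [hres, V1, V2, V3]
    exact bfsLoop_wrap n graph graph' hlg hGrel hGraw fuel
      ((PySem.List.pyGetD graph q []).foldl visitStep (r, rest, v)).2.1
      ((PySem.List.pyGetD graph q []).foldl visitStep (r, rest, v)).2.2
      ((PySem.List.pyGetD graph q []).foldl visitStep (r, rest, v)).1
      (by rw [visitFold_len]; exact hlen)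
      (by
        intro p hp
        rcases visitFold_pend _ _ _ _ p hp with h | h
        · exact hque p (by simp [h])
        · exact hGraw q p h)

-- ---- A's per-edge result equals the component size on the wrapped wire list ----

lemma perEdge_eq (n : Int) (wires : List (Int × Int))
    (hraw : ∀ w ∈ wires, -(n + 1) ≤ w.1 ∧ w.1 ≤ n ∧ -(n + 1) ≤ w.2 ∧ w.2 ≤ n)
    (w : Int × Int) (hw : w ∈ wires) :
    bfs w.1 (PySem.List.pySetD (List.replicate (n + 1).toNat (0 : Int)) w.2 1) (buildG n wires)
      = ((Mset (wires.map (wrapW n)) (wrapL n w.2) (wrapL n w.1)).length : Int) := by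
  have hwr := hraw w hw
  have hn : 0 ≤ n := by omega
  set wires' := wires.map (wrapW n) with hwires'
  have hraw' : ∀ v ∈ wires', 0 ≤ v.1 ∧ v.1 ≤ n ∧ 0 ≤ v.2 ∧ v.2 ≤ n := by
    intro v hv
    obtain ⟨u, hu, rfl⟩ := List.mem_map.mp hv
    have h := hraw u hu
    have h1 := wrap_range n u.1 h.1 h.2.1
    have h2 := wrap_range n u.2 h.2.2.1 h.2.2.2
    exact ⟨h1.1, h1.2, h2.1, h2.2⟩
  have hlg : ((buildG n wires).length : Int) = n + 1 := by
    unfold buildG; rw [length_buildFold]; simp; omega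
  have hGrel : ∀ a : Int, 0 ≤ a → a ≤ n →
      PySem.List.pyGetD (buildG n wires') a []
        = (PySem.List.pyGetD (buildG n wires) a []).map (wrapL n) := by
    have := buildFold_wrap n wires
      ((List.range (n + 1).toNat).map fun _ => ([] : List Int))
      ((List.range (n + 1).toNat).map fun _ => ([] : List Int))
      (by simp; omega) (by simp; omega) hraw
      (by intro a _ _; rw [init_rows]; rfl)
    exact fun a ha han => this a ha han
  have hGraw : ∀ (a : Int), ∀ x ∈ PySem.List.pyGetD (buildG n wires) a [],
      -(n + 1) ≤ x ∧ x ≤ n := by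
    have := buildFold_rows (P := fun x => -(n + 1) ≤ x ∧ x ≤ n) wires
      ((List.range (n + 1).toNat).map fun _ => ([] : List Int))
      (by intro a x hx; rw [init_rows] at hx; simp at hx)
      (by intro v hv; exact ⟨⟨(hraw v hv).1, (hraw v hv).2.1⟩, ⟨(hraw v hv).2.2.1, (hraw v hv).2.2.2⟩⟩)
    exact fun a x hx => this a x hx
  set v0 := PySem.List.pySetD (List.replicate (n + 1).toNat (0 : Int)) w.2 1 with hv0
  have hlrep : (((List.replicate (n + 1).toNat (0 : Int)).length : Nat) : Int) = n + 1 := by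
    simp; omega
  have hlv0 : ((v0.length : Nat) : Int) = n + 1 := by
    rw [hv0, PySem.List.length_pySetD]; exact hlrep
  have hv0' : v0 = PySem.List.pySetD (List.replicate (n + 1).toNat (0 : Int)) (wrapL n w.2) 1 := by
    rw [hv0, pySetD_wrap _ n w.2 1 hlrep hwr.2.2.1 hwr.2.2.2]
  have hv1' : PySem.List.pySetD v0 w.1 1 = PySem.List.pySetD v0 (wrapL n w.1) 1 :=
    pySetD_wrap v0 n w.1 1 hlv0 hwr.1 hwr.2.1
  have hstep1 : bfs w.1 v0 (buildG n wires)
      = bfs (wrapL n w.1) v0 (buildG n wires') := by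
    unfold bfs
    rw [hv1']
    exact (bfsLoop_wrap n (buildG n wires) (buildG n wires') hlg hGrel hGraw
      (v0.length + 1) [w.1] (PySem.List.pySetD v0 (wrapL n w.1) 1) 1
      (by rw [PySem.List.length_pySetD]; exact hlv0)
      (by intro p hp; simp at hp; rw [hp]; exact ⟨hwr.1, hwr.2.1⟩)).1.symm
  have hmem' : (wrapL n w.1, wrapL n w.2) ∈ wires' := by
    rw [hwires']
    exact List.mem_map.mpr ⟨w, hw, rfl⟩
  have hstep2 := bfs_eq n wires' hraw' (wrapL n w.1) (wrapL n w.2) hmem'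
    (buildG n wires') (mem_buildG n wires' hraw')
  rw [hstep1, hv0']
  rw [hstep2]

-- ---- relabeling isomorphism: without aliasing, wrapping is injective on the
-- ---- labels in play, so component sizes agree between wires and wrapped wires ----

lemma mem_ends_left (wires : List (Int × Int)) (w : Int × Int) (hw : w ∈ wires) :
    w.1 ∈ wireEnds wires := by
  unfold wireEnds
  exact List.mem_flatMap.mpr ⟨w, hw, by simp⟩

lemma mem_ends_right (wires : List (Int × Int)) (w : Int × Int) (hw : w ∈ wires) :
    w.2 ∈ wireEnds wires := by
  unfold wireEnds
  exact List.mem_flatMap.mpr ⟨w, hw, by simp⟩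

lemma adj_mem_ends (wires : List (Int × Int)) (a b : Int) (h : Adj wires a b) :
    a ∈ wireEnds wires ∧ b ∈ wireEnds wires := by
  rcases h with h | h
  · exact ⟨mem_ends_left wires _ h, mem_ends_right wires _ h⟩
  · exact ⟨mem_ends_right wires _ h, mem_ends_left wires _ h⟩

lemma reach_mem_ends (wires : List (Int × Int)) (j i : Int) (hi : i ∈ wireEnds wires) :
    ∀ x, Reach wires j i x → x ∈ wireEnds wires := by
  intro x hx
  induction hx with
  | base => exact hi
  | step a b _ hadj _ _ => exact (adj_mem_ends wires a b hadj).2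

lemma adj_wrap (n : Int) (wires : List (Int × Int)) (a b : Int) (h : Adj wires a b) :
    Adj (wires.map (wrapW n)) (wrapL n a) (wrapL n b) := by
  rcases h with h | h
  · exact Or.inl (List.mem_map.mpr ⟨(a, b), h, rfl⟩)
  · exact Or.inr (List.mem_map.mpr ⟨(b, a), h, rfl⟩)

lemma adj_unwrap (n : Int) (wires : List (Int × Int)) (a' b' : Int)
    (h : Adj (wires.map (wrapW n)) a' b') :
    ∃ a b, Adj wires a b ∧ a' = wrapL n a ∧ b' = wrapL n b := by
  rcases h with h | h
  · obtain ⟨w, hw, heq⟩ := List.mem_map.mp h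
    exact ⟨w.1, w.2, Or.inl hw,
      by rw [show a' = (wrapW n w).1 from by rw [heq]]; rfl,
      by rw [show b' = (wrapW n w).2 from by rw [heq]]; rfl⟩
  · obtain ⟨w, hw, heq⟩ := List.mem_map.mp h
    exact ⟨w.2, w.1, Or.inr hw,
      by rw [show a' = (wrapW n w).2 from by rw [heq]]; rfl,
      by rw [show b' = (wrapW n w).1 from by rw [heq]]; rfl⟩

lemma reach_wrap (n : Int) (wires : List (Int × Int)) (j i : Int)
    (hj : j ∈ wireEnds wires)
    (hinj : ∀ x ∈ wireEnds wires, ∀ y ∈ wireEnds wires, wrapL n x = wrapL n y → x = y) :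
    ∀ x, Reach wires j i x →
      Reach (wires.map (wrapW n)) (wrapL n j) (wrapL n i) (wrapL n x) := by
  intro x hx
  induction hx with
  | base => exact Reach.base
  | step a b ha hadj hbj ih =>
    refine Reach.step (wrapL n a) (wrapL n b) ih (adj_wrap n wires a b hadj) ?_
    intro heq
    exact hbj (hinj b (adj_mem_ends wires a b hadj).2 j hj heq)

lemma reach_unwrap (n : Int) (wires : List (Int × Int)) (j i : Int)
    (hi : i ∈ wireEnds wires)
    (hinj : ∀ x ∈ wireEnds wires, ∀ y ∈ wireEnds wires, wrapL n x = wrapL n y → x = y) :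
    ∀ x', Reach (wires.map (wrapW n)) (wrapL n j) (wrapL n i) x' →
      ∃ x, x ∈ wireEnds wires ∧ x' = wrapL n x ∧ Reach wires j i x := by
  intro x' hx'
  induction hx' with
  | base => exact ⟨i, hi, rfl, Reach.base⟩
  | step a' b' ha' hadj' hbj' ih =>
    obtain ⟨c, hc, hceq, hcreach⟩ := ih
    obtain ⟨a, b, hadj, haeq, hbeq⟩ := adj_unwrap n wires a' b' hadj'
    have hae : a ∈ wireEnds wires := (adj_mem_ends wires a b hadj).1
    have hbe : b ∈ wireEnds wires := (adj_mem_ends wires a b hadj).2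
    have hac : a = c := hinj a hae c hc (by rw [← haeq, ← hceq])
    refine ⟨b, hbe, hbeq, Reach.step a b (hac ▸ hcreach) hadj ?_⟩
    intro hbj
    exact hbj' (by rw [hbeq, hbj])

lemma mset_length_wrap (n : Int) (wires : List (Int × Int)) (j i : Int)
    (hi : i ∈ wireEnds wires) (hj : j ∈ wireEnds wires)
    (hinj : ∀ x ∈ wireEnds wires, ∀ y ∈ wireEnds wires, wrapL n x = wrapL n y → x = y) :
    (Mset (wires.map (wrapW n)) (wrapL n j) (wrapL n i)).length
      = (Mset wires j i).length := by
  obtain ⟨hnd, hmem⟩ := Mset_spec wires j i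
  obtain ⟨hnd', hmem'⟩ := Mset_spec (wires.map (wrapW n)) (wrapL n j) (wrapL n i)
  rw [← List.toFinset_card_of_nodup hnd, ← List.toFinset_card_of_nodup hnd']
  symm
  apply Finset.card_bij (i := fun x _ => wrapL n x)
  · intro x hx
    simp only [List.mem_toFinset] at hx ⊢
    exact (hmem' _).mpr (reach_wrap n wires j i hj hinj x ((hmem x).mp hx))
  · intro x hx y hy heq
    simp only [List.mem_toFinset] at hx hy
    exact hinj x (reach_mem_ends wires j i hi x ((hmem x).mp hx))
      y (reach_mem_ends wires j i hi y ((hmem y).mp hy)) heq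
  · intro x' hx'
    simp only [List.mem_toFinset] at hx' ⊢
    obtain ⟨x, _, hxeq, hxreach⟩ :=
      reach_unwrap n wires j i hi hinj x' ((hmem' x').mp hx')
    exact ⟨x, (hmem x).mpr hxreach, hxeq.symm⟩

lemma pre_inj (n : Int) (wires : List (Int × Int)) (hpre : Pre_solution n wires) :
    ∀ x ∈ wireEnds wires, ∀ y ∈ wireEnds wires, wrapL n x = wrapL n y → x = y := by
  obtain ⟨hrange, halias⟩ := hpre
  have hr : ∀ x ∈ wireEnds wires, -(n + 1) ≤ x ∧ x ≤ n := by
    intro x hx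
    unfold wireEnds at hx
    obtain ⟨w, hw, hxw⟩ := List.mem_flatMap.mp hx
    have := hrange w hw
    simp at hxw
    rcases hxw with rfl | rfl
    · exact ⟨this.1, this.2.1⟩
    · exact ⟨this.2.2.1, this.2.2.2⟩
  intro x hx y hy heq
  have hxr := hr x hx
  have hyr := hr y hy
  unfold wrapL at heq
  split_ifs at heq with h1 h2 h2
  · omega
  · exact absurd (show y = x + n + 1 by omega) (halias x hx y hy h1 (by omega))
  · exact absurd (show x = y + n + 1 by omega) (halias y hy x hx h2 (by omega))
  · omega

-- ---- coupling of B's bitmap sweep with the label-set sweep ----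

lemma ends_range (n : Int) (wires : List (Int × Int))
    (hrange : ∀ w ∈ wires, -(n + 1) ≤ w.1 ∧ w.1 ≤ n ∧ -(n + 1) ≤ w.2 ∧ w.2 ≤ n) :
    ∀ x ∈ wireEnds wires, -(n + 1) ≤ x ∧ x ≤ n := by
  intro x hx
  unfold wireEnds at hx
  obtain ⟨w, hw, hxw⟩ := List.mem_flatMap.mp hx
  have := hrange w hw
  simp at hxw
  rcases hxw with rfl | rfl
  · exact ⟨this.1, this.2.1⟩
  · exact ⟨this.2.2.1, this.2.2.2⟩

def InvC (n : Int) (comp M : List Int) : Prop :=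
  comp.length = (n + 1).toNat ∧
  (∀ v ∈ comp, v = 0 ∨ v = 1) ∧
  (∀ s : Int, 0 ≤ s → s ≤ n → (PySem.List.pyGetD comp s 0 = 1 ↔ ∃ x ∈ M, wrapL n x = s))

lemma invc_get01 (n : Int) (comp M : List Int) (hinv : InvC n comp M) (hn : 0 ≤ n)
    (s : Int) (h1 : 0 ≤ s) (h2 : s ≤ n) :
    PySem.List.pyGetD comp s 0 = 0 ∨ PySem.List.pyGetD comp s 0 = 1 := by
  have hlen : s.toNat < comp.length := by rw [hinv.1]; omega
  rw [PySem.List.pyGetD_eq_getElem comp 0 h1 (by omega)]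
  exact hinv.2.1 _ (comp.getElem_mem hlen)

lemma invc_label_iff (n : Int) (E comp M : List Int)
    (hinj : ∀ x ∈ E, ∀ y ∈ E, wrapL n x = wrapL n y → x = y)
    (hr : ∀ x ∈ E, -(n + 1) ≤ x ∧ x ≤ n) (hn : 0 ≤ n)
    (hM : ∀ x ∈ M, x ∈ E) (hinv : InvC n comp M)
    (x : Int) (hx : x ∈ E) :
    (PySem.List.pyGetD comp x 0 ≠ 0 ↔ x ∈ M) := by
  have hxr := hr x hx
  have hw := wrap_range n x hxr.1 hxr.2
  have hclen : ((comp.length : Nat) : Int) = n + 1 := by rw [hinv.1]; omega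
  rw [pyGetD_wrap comp n x 0 hclen hxr.1 hxr.2]
  rcases invc_get01 n comp M hinv hn (wrapL n x) hw.1 hw.2 with h | h
  · rw [h]
    constructor
    · intro hc; exact absurd rfl hc
    · intro hm
      have h1 := (hinv.2.2 (wrapL n x) hw.1 hw.2).mpr ⟨x, hm, rfl⟩
      rw [h] at h1
      exact absurd h1 (by norm_num)
  · rw [h]
    constructor
    · intro _
      obtain ⟨y, hyM, hyw⟩ := (hinv.2.2 (wrapL n x) hw.1 hw.2).mp h
      have := hinj y (hM y hyM) x hx hyw
      exact this ▸ hyM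
    · intro _; norm_num

lemma invc_mark (n : Int) (comp M : List Int) (hinv : InvC n comp M) (hn : 0 ≤ n)
    (b : Int) (hb1 : -(n + 1) ≤ b) (hb2 : b ≤ n) (hbM : b ∉ M) :
    InvC n (PySem.List.pySetD comp b 1) (PySem.Set.add M b) := by
  have hclen : ((comp.length : Nat) : Int) = n + 1 := by rw [hinv.1]; omega
  have hw := wrap_range n b hb1 hb2
  have hset : PySem.List.pySetD comp b 1 = PySem.List.pySetD comp (wrapL n b) 1 :=
    pySetD_wrap comp n b 1 hclen hb1 hb2
  have hadd : PySem.Set.add M b = M ++ [b] := PySem.Set.add_of_not_mem hbM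
  refine ⟨?_, ?_, ?_⟩
  · rw [hset, PySem.List.length_pySetD, hinv.1]
  · intro v hv
    rw [hset, PySem.List.pySetD_of_nonneg comp 1 hw.1] at hv
    rcases List.mem_or_eq_of_mem_set hv with h | h
    · exact hinv.2.1 v h
    · right; exact h
  · intro s h1 h2
    rw [hset, pyGetD_pySetD_int comp (wrapL n b) 1 s 0 hw.1 (by omega) h1 (by omega)]
    rw [hadd]
    by_cases hsb : s = wrapL n b
    · rw [if_pos hsb]
      constructor
      · intro _; exact ⟨b, by simp, hsb.symm⟩
      · intro _; rfl
    · rw [if_neg hsb, hinv.2.2 s h1 h2]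
      constructor
      · rintro ⟨x, hxM, hxw⟩; exact ⟨x, by simp [hxM], hxw⟩
      · rintro ⟨x, hxM, hxw⟩
        rcases List.mem_append.mp hxM with h | h
        · exact ⟨x, h, hxw⟩
        · simp at h; subst h; exact absurd hxw.symm hsb

lemma arrStep_coupling (n j : Int) (E : List Int)
    (hinj : ∀ x ∈ E, ∀ y ∈ E, wrapL n x = wrapL n y → x = y)
    (hr : ∀ x ∈ E, -(n + 1) ≤ x ∧ x ≤ n) (hn : 0 ≤ n)
    (comp M : List Int) (flag : Bool) (w : Int × Int)
    (hw1 : w.1 ∈ E) (hw2 : w.2 ∈ E)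
    (hM : ∀ x ∈ M, x ∈ E) (hinv : InvC n comp M) :
    InvC n (arrStep j (comp, flag) w).1 (altStep j (M, flag) w).1 ∧
    (arrStep j (comp, flag) w).2 = (altStep j (M, flag) w).2 ∧
    (∀ x ∈ (altStep j (M, flag) w).1, x ∈ E) := by
  have e1 : (PySem.List.pyGetD comp w.1 0 ≠ 0) ↔ w.1 ∈ M :=
    invc_label_iff n E comp M hinj hr hn hM hinv w.1 hw1
  have e2 : (PySem.List.pyGetD comp w.2 0 ≠ 0) ↔ w.2 ∈ M :=
    invc_label_iff n E comp M hinj hr hn hM hinv w.2 hw2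
  have e2' : (PySem.List.pyGetD comp w.2 0 = 0) ↔ w.2 ∉ M := by
    rw [← e2]; exact not_not.symm
  have g1 : (PySem.List.pyGetD comp w.1 0 ≠ 0 ∧ w.2 ≠ j ∧ PySem.List.pyGetD comp w.2 0 = 0)
      ↔ (w.1 ∈ M ∧ w.2 ≠ j ∧ w.2 ∉ M) := by rw [e1, e2']
  unfold arrStep altStep
  by_cases c1 : w.1 ∈ M ∧ w.2 ≠ j ∧ w.2 ∉ M
  · simp only [if_pos (g1.mpr c1), if_pos c1]
    have hr2 := hr w.2 hw2
    have hinv1 : InvC n (PySem.List.pySetD comp w.2 1) (PySem.Set.add M w.2) :=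
      invc_mark n comp M hinv hn w.2 hr2.1 hr2.2 c1.2.2
    have hM1 : ∀ x ∈ PySem.Set.add M w.2, x ∈ E := by
      intro x hx
      rcases (PySem.Set.mem_add M w.2 x).mp hx with h | rfl
      · exact hM x h
      · exact hw2
    have f1 : (PySem.List.pyGetD (PySem.List.pySetD comp w.2 1) w.2 0 ≠ 0)
        ↔ w.2 ∈ PySem.Set.add M w.2 :=
      invc_label_iff n E _ _ hinj hr hn hM1 hinv1 w.2 hw2
    have f2 : (PySem.List.pyGetD (PySem.List.pySetD comp w.2 1) w.1 0 = 0)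
        ↔ w.1 ∉ PySem.Set.add M w.2 := by
      rw [← invc_label_iff n E _ _ hinj hr hn hM1 hinv1 w.1 hw1]
      exact not_not.symm
    have g2 : (PySem.List.pyGetD (PySem.List.pySetD comp w.2 1) w.2 0 ≠ 0 ∧ w.1 ≠ j ∧
          PySem.List.pyGetD (PySem.List.pySetD comp w.2 1) w.1 0 = 0)
        ↔ (w.2 ∈ PySem.Set.add M w.2 ∧ w.1 ≠ j ∧ w.1 ∉ PySem.Set.add M w.2) := by
      rw [f1, f2]
    by_cases c2 : w.2 ∈ PySem.Set.add M w.2 ∧ w.1 ≠ j ∧ w.1 ∉ PySem.Set.add M w.2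
    · simp only [if_pos (g2.mpr c2), if_pos c2]
      have hr1 := hr w.1 hw1
      refine ⟨invc_mark n _ _ hinv1 hn w.1 hr1.1 hr1.2 c2.2.2, by trivial, ?_⟩
      intro x hx
      rcases (PySem.Set.mem_add _ w.1 x).mp hx with h | rfl
      · exact hM1 x h
      · exact hw1
    · simp only [if_neg (fun h => c2 (g2.mp h)), if_neg c2]
      exact ⟨hinv1, by trivial, hM1⟩
  · simp only [if_neg (fun h => c1 (g1.mp h)), if_neg c1]
    have f1 : (PySem.List.pyGetD comp w.2 0 ≠ 0) ↔ w.2 ∈ M := e2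
    have f2 : (PySem.List.pyGetD comp w.1 0 = 0) ↔ w.1 ∉ M := by
      rw [← e1]; exact not_not.symm
    have g2 : (PySem.List.pyGetD comp w.2 0 ≠ 0 ∧ w.1 ≠ j ∧ PySem.List.pyGetD comp w.1 0 = 0)
        ↔ (w.2 ∈ M ∧ w.1 ≠ j ∧ w.1 ∉ M) := by rw [f1, f2]
    by_cases c2 : w.2 ∈ M ∧ w.1 ≠ j ∧ w.1 ∉ M
    · simp only [if_pos (g2.mpr c2), if_pos c2]
      have hr1 := hr w.1 hw1
      refine ⟨invc_mark n comp M hinv hn w.1 hr1.1 hr1.2 c2.2.2, by trivial, ?_⟩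
      intro x hx
      rcases (PySem.Set.mem_add M w.1 x).mp hx with h | rfl
      · exact hM x h
      · exact hw1
    · simp only [if_neg (fun h => c2 (g2.mp h)), if_neg c2]
      exact ⟨hinv, by trivial, hM⟩

lemma foldl_arr_coupling (n j : Int) (E : List Int)
    (hinj : ∀ x ∈ E, ∀ y ∈ E, wrapL n x = wrapL n y → x = y)
    (hr : ∀ x ∈ E, -(n + 1) ≤ x ∧ x ≤ n) (hn : 0 ≤ n) :
    ∀ (ws : List (Int × Int)) (comp M : List Int) (flag : Bool),
    (∀ w ∈ ws, w.1 ∈ E ∧ w.2 ∈ E) → (∀ x ∈ M, x ∈ E) → InvC n comp M →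
    InvC n (ws.foldl (arrStep j) (comp, flag)).1 (ws.foldl (altStep j) (M, flag)).1 ∧
    (ws.foldl (arrStep j) (comp, flag)).2 = (ws.foldl (altStep j) (M, flag)).2 ∧
    (∀ x ∈ (ws.foldl (altStep j) (M, flag)).1, x ∈ E)
  | [], comp, M, flag, _, hM, hinv => ⟨hinv, rfl, hM⟩
  | w :: ws, comp, M, flag, hws, hM, hinv => by
    obtain ⟨hinv1, hflag1, hM1⟩ :=
      arrStep_coupling n j E hinj hr hn comp M flag w (hws w (by simp)).1 (hws w (by simp)).2 hM hinv
    simp only [List.foldl_cons]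
    rw [show arrStep j (comp, flag) w
        = ((arrStep j (comp, flag) w).1, (arrStep j (comp, flag) w).2) from rfl]
    rw [show altStep j (M, flag) w
        = ((altStep j (M, flag) w).1, (altStep j (M, flag) w).2) from rfl]
    rw [hflag1]
    exact foldl_arr_coupling n j E hinj hr hn ws _ _ _
      (fun v hv => hws v (by simp [hv])) hM1 hinv1

lemma arrLoop_coupling (n j : Int) (E : List Int) (wires : List (Int × Int))
    (hinj : ∀ x ∈ E, ∀ y ∈ E, wrapL n x = wrapL n y → x = y)
    (hr : ∀ x ∈ E, -(n + 1) ≤ x ∧ x ≤ n) (hn : 0 ≤ n)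
    (hws : ∀ w ∈ wires, w.1 ∈ E ∧ w.2 ∈ E) :
    ∀ (fuel : Nat) (comp M : List Int), (∀ x ∈ M, x ∈ E) → InvC n comp M →
    InvC n (arrLoop wires j fuel comp) (altLoop wires j fuel M)
  | 0, _, _, _, hinv => hinv
  | fuel + 1, comp, M, hM, hinv => by
    obtain ⟨hinv1, hflag1, hM1⟩ :=
      foldl_arr_coupling n j E hinj hr hn wires comp M false hws hM hinv
    simp only [arrLoop, altLoop]
    rw [hflag1]
    split_ifs with h
    · exact arrLoop_coupling n j E wires hinj hr hn hws fuel _ _ hM1 hinv1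
    · exact hinv1

lemma sum_01 : ∀ (l : List Int), (∀ v ∈ l, v = 0 ∨ v = 1) → l.sum = (l.count 1 : Int)
  | [], _ => by simp
  | v :: tl, h => by
    have htl := sum_01 tl (fun x hx => h x (by simp [hx]))
    rcases h v (by simp) with rfl | rfl
    · simp [List.count_cons, htl]
    · simp [List.count_cons, htl]
      omega

lemma arrSum_eq (n : Int) (wires : List (Int × Int)) (hpre : Pre_solution n wires)
    (w : Int × Int) (hw : w ∈ wires) :
    (arrLoop wires w.2 (2 * wires.length + 1)
        (PySem.List.pySetD (List.replicate (n + 1).toNat (0 : Int)) w.1 1)).foldl (· + ·) 0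
      = ((Mset wires w.2 w.1).length : Int) := by
  have hinj := pre_inj n wires hpre
  have hr := ends_range n wires hpre.1
  have hiE : w.1 ∈ wireEnds wires := mem_ends_left wires w hw
  have hjE : w.2 ∈ wireEnds wires := mem_ends_right wires w hw
  have hn : 0 ≤ n := by have := hr w.1 hiE; omega
  have hrepl : (((List.replicate (n + 1).toNat (0 : Int)).length : Nat) : Int) = n + 1 := by
    simp; omega
  have hri := hr w.1 hiE
  have hwi := wrap_range n w.1 hri.1 hri.2
  -- initial invariant, with M₀ = [w.1]
  have hinv0 : InvC n (PySem.List.pySetD (List.replicate (n + 1).toNat (0 : Int)) w.1 1)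
      (PySem.Set.ofList [w.1]) := by
    have hset : PySem.List.pySetD (List.replicate (n + 1).toNat (0 : Int)) w.1 1
        = PySem.List.pySetD (List.replicate (n + 1).toNat (0 : Int)) (wrapL n w.1) 1 :=
      pySetD_wrap _ n w.1 1 hrepl hri.1 hri.2
    refine ⟨?_, ?_, ?_⟩
    · rw [PySem.List.length_pySetD, List.length_replicate]
    · intro v hv
      rw [hset, PySem.List.pySetD_of_nonneg _ 1 hwi.1] at hv
      rcases List.mem_or_eq_of_mem_set hv with h | h
      · left; exact (List.eq_of_mem_replicate h)
      · right; exact h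
    · intro s h1 h2
      rw [hset, pyGetD_pySetD_int _ (wrapL n w.1) 1 s 0 hwi.1
            (by rw [List.length_replicate]; omega) h1 (by rw [List.length_replicate]; omega)]
      have hrep0 : PySem.List.pyGetD (List.replicate (n + 1).toNat (0 : Int)) s 0 = 0 := by
        rw [PySem.List.pyGetD_eq_getElem _ 0 h1 (by rw [List.length_replicate]; omega)]
        simp
      have hofl : PySem.Set.ofList [w.1] = [w.1] := rfl
      rw [hofl]
      by_cases hsw : s = wrapL n w.1
      · rw [if_pos hsw]
        constructor
        · intro _; exact ⟨w.1, by simp, hsw.symm⟩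
        · intro _; rfl
      · rw [if_neg hsw, hrep0]
        constructor
        · intro h; exact absurd h.symm (by norm_num)
        · rintro ⟨x, hx, hxw⟩
          simp at hx; subst hx
          exact absurd hxw.symm hsw
  have hM0 : ∀ x ∈ PySem.Set.ofList [w.1], x ∈ wireEnds wires := by
    intro x hx
    have : x ∈ [w.1] := hx
    simp at this; subst this; exact hiE
  have hws : ∀ v ∈ wires, v.1 ∈ wireEnds wires ∧ v.2 ∈ wireEnds wires :=
    fun v hv => ⟨mem_ends_left wires v hv, mem_ends_right wires v hv⟩
  have hinvF := arrLoop_coupling n w.2 (wireEnds wires) wires hinj hr hn hws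
    (2 * wires.length + 1) _ _ hM0 hinv0
  -- the final set is Mset by definition
  rw [show altLoop wires w.2 (2 * wires.length + 1) (PySem.Set.ofList [w.1])
      = Mset wires w.2 w.1 from rfl] at hinvF
  obtain ⟨hMnd, hMmem⟩ := Mset_spec wires w.2 w.1
  have hMsub : ∀ x ∈ Mset wires w.2 w.1, x ∈ wireEnds wires :=
    fun x hx => reach_mem_ends wires w.2 w.1 hiE x ((hMmem x).mp hx)
  set compF := arrLoop wires w.2 (2 * wires.length + 1)
      (PySem.List.pySetD (List.replicate (n + 1).toNat (0 : Int)) w.1 1) with hcompF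
  rw [show (compF.foldl (· + ·) (0 : Int)) = compF.sum from List.sum_eq_foldl.symm]
  rw [sum_01 compF hinvF.2.1]
  have hcount : compF.count 1 = ((Mset wires w.2 w.1).map (wrapL n)).length := by
    apply count_eq_of_char (n + 1).toNat compF _ hinvF.1
    · exact List.Nodup.map_on
        (fun x hx y hy => hinj x (hMsub x hx) y (hMsub y hy)) hMnd
    · intro s hs
      obtain ⟨x, hx, rfl⟩ := List.mem_map.mp hs
      have hxr := hr x (hMsub x hx)
      have := wrap_range n x hxr.1 hxr.2
      exact ⟨this.1, by omega⟩
    · intro x h1 h2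
      unfold Vis
      rw [hinvF.2.2 x h1 (by omega)]
      constructor
      · rintro ⟨y, hy, hyw⟩; exact List.mem_map.mpr ⟨y, hy, hyw⟩
      · intro h; obtain ⟨y, hy, hyw⟩ := List.mem_map.mp h; exact ⟨y, hy, hyw⟩
  rw [hcount, List.length_map]

-- ===== VERDICT (by name: the statement is the Claim_ definition above) =====
theorem solution_spec : Claim_equal_solution := by
  intro n wires _ hpre
  show solution n wires = solution_alt n wires
  show (wires.foldl
      (fun answer w => min answer
        |bfs w.1 (PySem.List.pySetD (List.replicate (n + 1).toNat (0 : Int)) w.2 1) (buildG n wires) * 2 - n|) n)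
      = wires.foldl
      (fun best w => min best
        |2 * (arrLoop wires w.2 (2 * wires.length + 1)
          (PySem.List.pySetD (List.replicate (n + 1).toNat (0 : Int)) w.1 1)).foldl (· + ·) 0 - n|) n
  apply PySem.List.foldl_congr_mem
  intro acc w hw
  rw [perEdge_eq n wires hpre.1 w hw]
  rw [mset_length_wrap n wires w.2 w.1
    (mem_ends_left wires w hw) (mem_ends_right wires w hw) (pre_inj n wires hpre)]
  rw [arrSum_eq n wires hpre w hw]
  rw [mul_comm (((Mset wires w.2 w.1).length : Nat) : Int) 2]
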